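-- pv_equiv track=rewrite | github.com/isimbiange/LeetCode | 2230-minimum-cost-to-reach-city-with-discounts/2230-minimum-cost-to-reach-city-with-discounts.py | minimumCost
-- ===== SOURCE A (Python) =====
-- import heapq
-- from collections import defaultdict
-- from typing import List
--
-- def minimumCost(n: int, highways: List[List[int]], discounts: int) -> int:
--     graph = defaultdict(list)
--
--     # Build the undirected graph
--     for u, v, cost in highways:
--         graph[u].append((v, cost))
--         graph[v].append((u, cost))
--
--     # (total_cost, current_city, discounts_left)
--     heap = [(0, 0, discounts)]
--
--     # visited[city][d] = True means we've already been to `city` with `d` discounts left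
--     visited = [[False] * (discounts + 1) for _ in range(n)]
--
--     while heap:
--         cost, city, d = heapq.heappop(heap)
--
--         # If we've reached the destination city n - 1, return the cost
--         if city == n - 1:
--             return cost
--
--         # Skip if we've already visited this state
--         if visited[city][d]:
--             continue
--         visited[city][d] = True
--
--         # Explore neighbors
--         for nei, toll in graph[city]:
--             # Move without using a discount
--             heapq.heappush(heap, (cost + toll, nei, d))
--             # Move using a discount, if any left
--             if d > 0:
--                 heapq.heappush(heap, (cost + toll // 2, nei, d - 1))
--
--     return -1
-- ===== SOURCE B (Python) =====
-- def minimumCost(n, highways, discounts):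
--     # Bellman-Ford-style iterative relaxation over (city, discounts_left) states;
--     # no priority queue: sweep all known states until a full pass changes nothing.
--     adj = {}
--     for u, v, cost in highways:
--         adj.setdefault(u, []).append((v, cost))
--         adj.setdefault(v, []).append((u, cost))
--
--     dist = {(0, discounts): 0}
--     for _ in range(n * (discounts + 1)):
--         changed = False
--         for (city, d), c in list(dist.items()):
--             for nei, toll in adj.get(city, []):
--                 cur = dist.get((nei, d))
--                 if cur is None or c + toll < cur:
--                     dist[(nei, d)] = c + toll
--                     changed = True
--                 if d > 0:
--                     half = c + toll // 2
--                     cur = dist.get((nei, d - 1))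
--                     if cur is None or half < cur:
--                         dist[(nei, d - 1)] = half
--                         changed = True
--         if not changed:
--             break
--
--     best = None
--     for d in range(discounts + 1):
--         c = dist.get((n - 1, d))
--         if c is not None and (best is None or c < best):
--             best = c
--     return -1 if best is None else best
-- ===== Notes on version B (the rewrite author's own statement) =====
-- stated objective: alternative
-- what changed: Replaces heap-based Dijkstra with early exit by Bellman-Ford-style iterative relaxation over (city, discounts-left) states: repeatedly sweep all known states relaxing both the full-toll and half-toll moves until a full pass changes nothing (or n*(discounts+1) rounds elapse), then take the minimum over discount levels at city n-1.
-- outside the precondition, e.g. on minimumCost(1, [], -1): A returns 0, B returns -1; on minimumCost(4, [[0, -2, 0], [0, 2, 5], [2, 3, 1]], 0): A returns -1, B returns 6; on minimumCost(3, [[0, 1, 10], [0, 2, 1], [1, 2, -100]], 0): A returns 1, B returns -199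
import Mathlib
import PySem

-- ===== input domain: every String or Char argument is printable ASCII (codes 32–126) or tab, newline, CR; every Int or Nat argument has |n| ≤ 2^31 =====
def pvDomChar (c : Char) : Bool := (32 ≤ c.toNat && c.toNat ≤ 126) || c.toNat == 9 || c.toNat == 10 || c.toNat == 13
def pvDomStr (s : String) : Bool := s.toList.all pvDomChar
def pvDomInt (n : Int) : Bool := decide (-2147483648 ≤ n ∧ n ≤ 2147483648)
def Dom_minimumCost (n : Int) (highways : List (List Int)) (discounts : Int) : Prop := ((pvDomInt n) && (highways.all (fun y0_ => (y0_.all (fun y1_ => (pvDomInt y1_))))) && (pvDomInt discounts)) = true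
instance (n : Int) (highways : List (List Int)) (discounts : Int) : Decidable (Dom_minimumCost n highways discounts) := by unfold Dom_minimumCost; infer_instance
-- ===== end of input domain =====

-- B replaces A's heap-based Dijkstra (early exit at city n-1) by Bellman-Ford-style
-- iterative relaxation over (city, discounts-left) states; same exact results on Pre_.

-- ===== PORT A =====
-- Port of the Python Dijkstra.  The heapq heap is modelled as the list of its
-- elements; a pop removes a lexicographically least (cost, city, d) triple, which is
-- exactly the element heapq.heappop returns.  Where the Python raises
-- (IndexError/ValueError, all outside Pre_) the port returns -2.

/-- lexicographic ≤ on (cost, city, d) triples, Python's tuple order. -/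
def eLeA (a b : Int × Int × Int) : Bool :=
  decide (a.1 < b.1 ∨ (a.1 = b.1 ∧ (a.2.1 < b.2.1 ∨ (a.2.1 = b.2.1 ∧ a.2.2 ≤ b.2.2))))

/-- heapq.heappop on the nonempty heap `e :: l`: least element and the rest. -/
def popMinA (e : Int × Int × Int) (l : List (Int × Int × Int)) :
    (Int × Int × Int) × List (Int × Int × Int) :=
  match l with
  | [] => (e, [])
  | x :: xs =>
    let next := if eLeA e x then e else x
    let keep := if eLeA e x then x else e
    let r := popMinA next xs
    (r.1, keep :: r.2)

/-- `graph = defaultdict(list); graph[u].append((v,cost)); graph[v].append((u,cost))`;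
`none` = the unpack `u, v, cost = h` raises (row not a triple). -/
def buildGraphA (highways : List (List Int)) : Option (PySem.Dict Int (List (Int × Int))) :=
  highways.foldl (fun og h =>
    og.bind fun g =>
      match h with
      | [u, v, c] => some ((g.modify u [] (· ++ [(v, c)])).modify v [] (· ++ [(u, c)]))
      | _ => none) (some PySem.Dict.empty)

/-- the two heappushes for one neighbour `(nei, toll)` of the popped `(cost, city, d)`. -/
def pushesA (g : PySem.Dict Int (List (Int × Int))) (cost city d : Int) :
    List (Int × Int × Int) :=
  (g.getD city []).flatMap fun p =>
    (cost + p.2, p.1, d) ::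
      (if 0 < d then [(cost + PySem.Int.floordiv p.2 2, p.1, d - 1)] else [])

/-- `visited[city][d]` (Python indexing, so including negative-index wraparound). -/
def vgetA (vis : List (List Bool)) (city d : Int) : Option Bool :=
  (PySem.List.pyGet? vis city).bind fun row => PySem.List.pyGet? row d

/-- `visited[city][d] = True`. -/
def vsetA (vis : List (List Bool)) (city d : Int) : Option (List (List Bool)) :=
  (PySem.List.pyGet? vis city).bind fun row =>
    (PySem.List.pySet? row d true).bind fun row' => PySem.List.pySet? vis city row'

/-- the `while heap:` loop; fuel only makes the recursion structural (it is proved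
sufficient on Pre_ inputs); -2 = a Python exception (outside Pre_). -/
def loopA (n : Int) (g : PySem.Dict Int (List (Int × Int))) :
    Nat → List (Int × Int × Int) → List (List Bool) → Int
  | _, [], _ => -1
  | 0, _ :: _, _ => -2
  | fuel + 1, e :: rest, vis =>
    let pr := popMinA e rest
    let cost := pr.1.1
    let city := pr.1.2.1
    let d := pr.1.2.2
    if city = n - 1 then cost
    else
      match vgetA vis city d with
      | none => -2
      | some true => loopA n g fuel pr.2 vis
      | some false =>
        match vsetA vis city d with
        | none => -2
        | some vis' => loopA n g fuel (pr.2 ++ pushesA g cost city d) vis'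

def minimumCost (n : Int) (highways : List (List Int)) (discounts : Int) : Int :=
  match buildGraphA highways with
  | none => -2
  | some g =>
    let vis := List.replicate n.toNat (List.replicate (discounts + 1).toNat false)
    loopA n g ((n.toNat * (discounts + 1).toNat + 1) * (4 * highways.length + 2) + 2)
      [(0, 0, discounts)] vis

-- ===== PORT B =====
-- Port of Source B: Bellman-Ford-style relaxation.  `adj.setdefault(u, []).append(x)`
-- is the in-place defaultdict append, i.e. Dict.modify with default [].

/-- `adj.setdefault(k, []).append(x)`: make sure the key is present (default []),
then the stored list gains x in place. -/
def appendAdjB (g : PySem.Dict Int (List (Int × Int))) (k : Int) (x : Int × Int) :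
    PySem.Dict Int (List (Int × Int)) :=
  let g1 := g.setdefault k []
  g1.insert k (g1.getD k [] ++ [x])

def buildAdjB (highways : List (List Int)) : Option (PySem.Dict Int (List (Int × Int))) :=
  highways.foldl (fun og h =>
    og.bind fun g =>
      match h with
      | [u, v, c] => some (appendAdjB (appendAdjB g u (v, c)) v (u, c))
      | _ => none) (some PySem.Dict.empty)

/-- `cur = dist.get(key); if cur is None or val < cur: dist[key] = val; changed = True`. -/
def relax1B (dist : PySem.Dict (Int × Int) Int) (key : Int × Int) (val : Int)
    (changed : Bool) : PySem.Dict (Int × Int) Int × Bool :=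
  match dist.get? key with
  | none => (dist.insert key val, true)
  | some cur => if val < cur then (dist.insert key val, true) else (dist, changed)

/-- body of `for nei, toll in adj.get(city, [])`, relaxing the full-toll move and,
if `d > 0`, the discounted move. -/
def relaxStepB (acc : PySem.Dict (Int × Int) Int × Bool) (cd : Int × Int) (c : Int)
    (p : Int × Int) : PySem.Dict (Int × Int) Int × Bool :=
  let a1 := relax1B acc.1 (p.1, cd.2) (c + p.2) acc.2
  if 0 < cd.2 then relax1B a1.1 (p.1, cd.2 - 1) (c + PySem.Int.floordiv p.2 2) a1.2
  else a1

/-- one sweep over the snapshot `list(dist.items())`; returns (dist, changed). -/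
def relaxRoundB (adj : PySem.Dict Int (List (Int × Int))) (dist : PySem.Dict (Int × Int) Int) :
    PySem.Dict (Int × Int) Int × Bool :=
  dist.items.foldl
    (fun acc it => (adj.getD it.1.1 []).foldl (fun acc2 p => relaxStepB acc2 it.1 it.2 p) acc)
    (dist, false)

/-- `for _ in range(k): ...; if not changed: break`. -/
def bfLoopB (adj : PySem.Dict Int (List (Int × Int))) :
    Nat → PySem.Dict (Int × Int) Int → PySem.Dict (Int × Int) Int
  | 0, dist => dist
  | k + 1, dist =>
    let r := relaxRoundB adj dist
    if r.2 then bfLoopB adj k r.1 else r.1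

/-- `for d in range(discounts+1): ...` running minimum of `dist.get((n-1, d))`. -/
def bestScanB (dist : PySem.Dict (Int × Int) Int) (n : Int) (best : Option Int)
    (d : Int) : Option Int :=
  match dist.get? (n - 1, d) with
  | none => best
  | some c =>
    match best with
    | none => some c
    | some b => if c < b then some c else best

def minimumCost_alt (n : Int) (highways : List (List Int)) (discounts : Int) : Int :=
  match buildAdjB highways with
  | none => -2
  | some adj =>
    let dist0 := (PySem.Dict.empty : PySem.Dict (Int × Int) Int).insert (0, discounts) 0
    let dist := bfLoopB adj (n * (discounts + 1)).toNat dist0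
    match (PySem.List.pyRange 0 (discounts + 1) 1).foldl (bestScanB dist n) none with
    | none => -1
    | some b => b

-- ===== PRECONDITION & SPEC =====
-- Pre_ admits n ≥ 1, discounts ≥ 0, rows that are triples [u, v, toll], and then either
-- (a) the problem's natural domain — 0 ≤ toll, and 0 ≤ u, v < n whenever n > 1 so the
-- rows are ever indexed — or (b) graphs whose rows never touch city 0, where A trivially
-- never leaves the start whatever the labels and tolls are; outside it A raises
-- IndexError/ValueError, or returns accidents of negative-index wraparound and of
-- running Dijkstra on negative edge weights (see claim.json cites).
def Pre_minimumCost (n : Int) (highways : List (List Int)) (discounts : Int) : Prop :=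
  1 ≤ n ∧ 0 ≤ discounts ∧ (∀ h ∈ highways, h.length = 3) ∧
    ((∀ h ∈ highways, 0 ≤ h.getD 2 0 ∧
        (1 < n → (0 ≤ h.getD 0 0 ∧ h.getD 0 0 < n) ∧ (0 ≤ h.getD 1 0 ∧ h.getD 1 0 < n))) ∨
      (∀ h ∈ highways, h.getD 0 0 ≠ 0 ∧ h.getD 1 0 ≠ 0))

instance (n : Int) (highways : List (List Int)) (discounts : Int) :
    Decidable (Pre_minimumCost n highways discounts) := by
  unfold Pre_minimumCost; infer_instance

def pvWitness_minimumCost : Int × List (List Int) × Int := (3, [[0, 1, 4], [1, 2, 3], [0, 2, 9]], 1)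

def Spec_minimumCost (n : Int) (highways : List (List Int)) (discounts : Int) (out : Int) : Prop := out = minimumCost_alt n highways discounts
instance (n : Int) (highways : List (List Int)) (discounts : Int) (out : Int) : Decidable (Spec_minimumCost n highways discounts out) := by unfold Spec_minimumCost; infer_instance

-- ===== CLAIM (what is proved, stated in full; the proofs are below) =====
def Claim_equal_minimumCost : Prop := ∀ (n : Int) (highways : List (List Int)) (discounts : Int), Dom_minimumCost n highways discounts → Pre_minimumCost n highways discounts → Spec_minimumCost n highways discounts (minimumCost n highways discounts)

-- ===== LEMMAS AND PROOFS =====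

-- ---------- the common state graph ----------

/-- adjacency list of a city. -/
def adjOf (g : PySem.Dict Int (List (Int × Int))) (u : Int) : List (Int × Int) := g.getD u []

/-- one move of the state graph: pay the toll, or half of it using a discount. -/
inductive EdgeP (g : PySem.Dict Int (List (Int × Int))) :
    (Int × Int) → (Int × Int) → Int → Prop
  | full {u d v toll} : (v, toll) ∈ adjOf g u → EdgeP g (u, d) (v, d) toll
  | half {u d v toll} : (v, toll) ∈ adjOf g u → 0 < d →
      EdgeP g (u, d) (v, d - 1) (PySem.Int.floordiv toll 2)

/-- walk from s to t of total cost c visiting (after s) exactly the states in l. -/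
inductive WFrom (g : PySem.Dict Int (List (Int × Int))) :
    (Int × Int) → (Int × Int) → Int → List (Int × Int) → Prop
  | refl (s) : WFrom g s s 0 []
  | cons {s u t w c l} : EdgeP g s u w → WFrom g u t c l → WFrom g s t (w + c) (u :: l)

def ReachP (g : PySem.Dict Int (List (Int × Int))) (disc : Int) (t : Int × Int) (c : Int) : Prop :=
  ∃ l, WFrom g (0, disc) t c l

/-- what both programs return: the least cost of reaching city n-1 (any discount level),
or -1 when unreachable. -/
def GoodR (n : Int) (g : PySem.Dict Int (List (Int × Int))) (disc r : Int) : Prop :=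
  ((∃ d, ReachP g disc (n - 1, d) r) ∧ ∀ x d, ReachP g disc (n - 1, d) x → r ≤ x)
  ∨ (r = -1 ∧ ∀ x d, ¬ ReachP g disc (n - 1, d) x)

/-- well-formed graph: every listed edge has in-range endpoints and nonnegative toll. -/
def GWf (n : Int) (g : PySem.Dict Int (List (Int × Int))) : Prop :=
  ∀ u v toll, (v, toll) ∈ adjOf g u → 0 ≤ u ∧ u < n ∧ 0 ≤ v ∧ v < n ∧ 0 ≤ toll

/-- the weaker fact available even when city labels are unconstrained (n = 1). -/
def GWt (g : PySem.Dict Int (List (Int × Int))) : Prop :=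
  ∀ u v toll, (v, toll) ∈ adjOf g u → 0 ≤ toll

lemma gwf_gwt {n g} (hg : GWf n g) : GWt g := fun u v toll hm => (hg u v toll hm).2.2.2.2

def InBox (n disc : Int) (s : Int × Int) : Prop :=
  0 ≤ s.1 ∧ s.1 < n ∧ 0 ≤ s.2 ∧ s.2 ≤ disc

lemma goodR_unique {n g disc r r'} (h : GoodR n g disc r) (h' : GoodR n g disc r') : r = r' := by
  rcases h with ⟨⟨d, hr⟩, hmin⟩ | ⟨he, hnone⟩
  · rcases h' with ⟨⟨d', hr'⟩, hmin'⟩ | ⟨he', hnone'⟩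
    · exact le_antisymm (hmin _ _ hr') (hmin' _ _ hr)
    · exact absurd hr (hnone' _ _)
  · rcases h' with ⟨⟨d', hr'⟩, hmin'⟩ | ⟨he', hnone'⟩
    · exact absurd hr' (hnone _ _)
    · rw [he, he']

-- ---------- walk utilities ----------

lemma wfrom_nil {g s t c} (h : WFrom g s t c []) : t = s ∧ c = 0 := by
  cases h; exact ⟨rfl, rfl⟩

lemma wfrom_append {g s u t c1 c2 l1 l2} (h1 : WFrom g s u c1 l1) (h2 : WFrom g u t c2 l2) :
    WFrom g s t (c1 + c2) (l1 ++ l2) := by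
  induction h1 generalizing t c2 l2 with
  | refl s => simpa using h2
  | cons he hw ih =>
    rename_i s' u' t' w c l
    have := WFrom.cons he (ih h2)
    simpa [add_assoc] using this

lemma wfrom_snoc {g s t c l v} (h : WFrom g s t c (l ++ [v])) :
    v = t ∧ ∃ c1 w m, WFrom g s m c1 l ∧ EdgeP g m t w ∧ c = c1 + w := by
  induction l generalizing s c with
  | nil =>
    cases h with
    | cons he hw =>
      obtain ⟨ht, hc⟩ := wfrom_nil hw
      subst ht; subst hc
      exact ⟨rfl, 0, _, s, WFrom.refl s, he, by ring⟩
  | cons x xs ih =>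
    cases h with
    | cons he hw =>
      obtain ⟨hv, c1, w, m, hw', he', hc⟩ := ih hw
      exact ⟨hv, _ + c1, w, m, WFrom.cons he hw', he', by rw [hc]; ring⟩

lemma wfrom_split {g s t c l1 u l2} (h : WFrom g s t c (l1 ++ u :: l2)) :
    ∃ c1 c2, WFrom g s u c1 (l1 ++ [u]) ∧ WFrom g u t c2 l2 ∧ c = c1 + c2 := by
  induction l1 generalizing s c with
  | nil =>
    cases h with
    | cons he hw =>
      rename_i w c'
      exact ⟨w, c', by simpa using WFrom.cons he (WFrom.refl u), hw, by ring⟩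
  | cons x xs ih =>
    cases h with
    | cons he hw =>
      obtain ⟨c1, c2, h1, h2, hc⟩ := ih hw
      exact ⟨_ + c1, c2, WFrom.cons he h1, h2, by rw [hc]; ring⟩

lemma edge_nonneg {g s t w} (hg : GWt g) (h : EdgeP g s t w) : 0 ≤ w := by
  cases h with
  | full hm => exact hg _ _ _ hm
  | half hm hd =>
    have ht := hg _ _ _ hm
    rw [PySem.Int.floordiv_eq_ediv_of_pos (by norm_num)]
    exact Int.ediv_nonneg ht (by norm_num)

lemma wfrom_nonneg {g s t c l} (hg : GWt g) (h : WFrom g s t c l) : 0 ≤ c := by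
  induction h with
  | refl => exact le_refl 0
  | cons he hw ih => exact add_nonneg (edge_nonneg hg he) ih

lemma edge_box {n g disc s t w} (hg : GWf n g) (h : EdgeP g s t w) (hs : InBox n disc s) :
    InBox n disc t := by
  cases h with
  | full hm =>
    obtain ⟨_, _, hv0, hvn, _⟩ := hg _ _ _ hm
    exact ⟨hv0, hvn, hs.2.2.1, hs.2.2.2⟩
  | half hm hd =>
    obtain ⟨_, _, hv0, hvn, _⟩ := hg _ _ _ hm
    exact ⟨hv0, hvn, by omega, by have := hs.2.2.2; omega⟩

lemma wfrom_box {n g disc s t c l} (hg : GWf n g) (h : WFrom g s t c l) (hs : InBox n disc s) :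
    InBox n disc t ∧ ∀ u ∈ l, InBox n disc u := by
  induction h with
  | refl => exact ⟨hs, by simp⟩
  | cons he hw ih =>
    have hu := edge_box (disc := disc) hg he hs
    obtain ⟨ht, hl⟩ := ih hu
    refine ⟨ht, ?_⟩
    intro x hx
    rcases List.mem_cons.mp hx with rfl | hx
    · exact hu
    · exact hl _ hx

lemma reach_step {g disc s c t w} (h : ReachP g disc s c) (he : EdgeP g s t w) :
    ReachP g disc t (c + w) := by
  obtain ⟨l, hw⟩ := h
  exact ⟨l ++ [t], by simpa using wfrom_append hw (WFrom.cons he (WFrom.refl t))⟩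

-- ---------- duplicates and walk shortening ----------

lemma not_nodup_split {α : Type} {l : List α} (h : ¬ l.Nodup) :
    ∃ a l1 l2 l3, l = l1 ++ a :: l2 ++ a :: l3 := by
  induction l with
  | nil => simp at h
  | cons x xs ih =>
    by_cases hx : x ∈ xs
    · obtain ⟨l2, l3, rfl⟩ := List.append_of_mem hx
      exact ⟨x, [], l2, l3, by simp⟩
    · have : ¬ xs.Nodup := by
        intro hnd; exact h (List.nodup_cons.mpr ⟨hx, hnd⟩)
      obtain ⟨a, l1, l2, l3, rfl⟩ := ih this
      exact ⟨a, x :: l1, l2, l3, by simp⟩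

noncomputable def FBox (n disc : Int) : Finset (Int × Int) :=
  Finset.Icc 0 (n - 1) ×ˢ Finset.Icc 0 disc

lemma mem_FBox {n disc s} : s ∈ FBox n disc ↔ InBox n disc s := by
  simp [FBox, Finset.mem_product, InBox]
  omega

lemma card_FBox {n disc : Int} (hn : 0 < n) (hd : 0 ≤ disc) :
    (FBox n disc).card = (n * (disc + 1)).toNat := by
  rw [FBox, Finset.card_product, Int.card_Icc, Int.card_Icc]
  have h1 : (n - 1 + 1 - 0) = n := by ring
  have h2 : (disc + 1 - 0) = disc + 1 := by ring
  rw [h1, h2]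
  have : n * (disc + 1) = (n.toNat : Int) * ((disc + 1).toNat : Int) := by
    rw [Int.toNat_of_nonneg (by omega), Int.toNat_of_nonneg (by omega)]
  rw [this, ← Nat.cast_mul, Int.toNat_natCast]

lemma pigeonhole_box {n disc : Int} (hn : 0 < n) (hd : 0 ≤ disc) {sl : List (Int × Int)}
    (hmem : ∀ u ∈ sl, InBox n disc u) (hlen : (n * (disc + 1)).toNat < sl.length) :
    ¬ sl.Nodup := by
  intro hnd
  have hsub : sl.toFinset ⊆ FBox n disc := by
    intro x hx
    exact mem_FBox.mpr (hmem x (List.mem_toFinset.mp hx))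
  have h1 : sl.toFinset.card = sl.length := List.toFinset_card_of_nodup hnd
  have h2 := Finset.card_le_card hsub
  rw [h1, card_FBox hn hd] at h2
  omega

lemma wfrom_shorten {n g disc t c l} (hg : GWf n g) (hn : 0 < n) (hd : 0 ≤ disc)
    (h : WFrom g (0, disc) t c l) :
    ∃ l' c', c' ≤ c ∧ l'.length < (n * (disc + 1)).toNat ∧ WFrom g (0, disc) t c' l' := by
  by_cases hlen : l.length < (n * (disc + 1)).toNat
  · exact ⟨l, c, le_refl c, hlen, h⟩
  · have hs0 : InBox n disc (0, disc) := ⟨le_refl 0, hn, hd, le_refl disc⟩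
    have hbox := (wfrom_box hg h hs0).2
    have hdup : ¬ ((0, disc) :: l).Nodup := by
      apply pigeonhole_box hn hd
      · intro u hu
        rcases List.mem_cons.mp hu with rfl | hu
        · exact hs0
        · exact hbox _ hu
      · simp; omega
    obtain ⟨a, l1, l2, l3, heq⟩ := not_nodup_split hdup
    -- build a strictly shorter walk of no larger cost, then recurse
    have hshort : ∃ l'' c'', c'' ≤ c ∧ l''.length < l.length ∧ WFrom g (0, disc) t c'' l'' := by
      cases l1 with
      | nil =>
        rw [List.nil_append] at heq
        injection heq with ha hl
        rw [← ha] at hl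
        rw [show l2.append ((0, disc) :: l3) = l2 ++ (0, disc) :: l3 from rfl] at hl
        have h' : WFrom g (0, disc) t c (l2 ++ (0, disc) :: l3) := by rw [← hl]; exact h
        obtain ⟨c1, c2, h1, h2, hc⟩ := wfrom_split h'
        refine ⟨l3, c2, ?_, ?_, h2⟩
        · have := wfrom_nonneg (gwf_gwt hg) h1; omega
        · rw [hl]; simp; omega
      | cons x l1' =>
        have hl : l = l1' ++ a :: (l2 ++ a :: l3) := by
          have := congrArg List.tail heq; simpa using this
        have h' : WFrom g (0, disc) t c (l1' ++ a :: (l2 ++ a :: l3)) := by rw [← hl]; exact h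
        obtain ⟨c1, c2, h1, h2, hc⟩ := wfrom_split h'
        obtain ⟨c2a, c2b, h2a, h2b, hc2⟩ := wfrom_split (l1 := l2) h2
        have hcomp := wfrom_append h1 h2b
        refine ⟨(l1' ++ [a]) ++ l3, c1 + c2b, ?_, ?_, hcomp⟩
        · have := wfrom_nonneg (gwf_gwt hg) h2a; omega
        · rw [hl]; simp
    obtain ⟨l'', c'', hle, hlt, hw⟩ := hshort
    have := wfrom_shorten hg hn hd hw
    obtain ⟨l', c', hle', hlt', hw'⟩ := this
    exact ⟨l', c', le_trans hle' hle, hlt', hw'⟩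
termination_by l.length
decreasing_by exact hlt

-- ---------- graph building ----------

lemma getD_not_contains {g : PySem.Dict Int (List (Int × Int))} {k : Int}
    (h : g.contains k = false) : g.getD k [] = [] := by
  unfold PySem.Dict.getD PySem.Dict.get? PySem.Dict.contains at *
  rw [List.find?_eq_none.mpr]
  · rfl
  · intro p hp
    rw [List.any_eq_false] at h
    exact fun hk => h p hp hk

lemma appendAdjB_eq_modify (g : PySem.Dict Int (List (Int × Int))) (k : Int) (x : Int × Int) :
    appendAdjB g k x = g.modify k [] (· ++ [x]) := by
  unfold appendAdjB PySem.Dict.modify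
  by_cases hc : g.contains k
  · rw [PySem.Dict.setdefault_of_contains _ _ hc]
  · rw [PySem.Dict.setdefault_of_not_contains _ _ (by simpa using hc)]
    show (g.insert k []).insert k ((g.insert k []).getD k [] ++ [x])
        = g.insert k ((fun l => l ++ [x]) (g.getD k []))
    rw [PySem.Dict.getD_insert]
    simp only [if_pos rfl]
    rw [PySem.Dict.insert_insert_self]
    congr 1
    rw [getD_not_contains (by simpa using hc)]
    simp

lemma build_eq : buildAdjB = buildGraphA := by
  funext highways
  unfold buildAdjB buildGraphA
  congr 1
  funext og h
  congr 1
  funext g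
  rcases h with _ | ⟨u, _ | ⟨v, _ | ⟨c, _ | ⟨d, t⟩⟩⟩⟩ <;> simp [appendAdjB_eq_modify]

lemma adjOf_modify (g : PySem.Dict Int (List (Int × Int))) (u x : Int)
    (f : List (Int × Int) → List (Int × Int)) :
    adjOf (g.modify u [] f) x = if x = u then f (adjOf g u) else adjOf g x := by
  unfold adjOf PySem.Dict.modify
  rw [PySem.Dict.getD_insert]

lemma len3 {h : List Int} (hl : h.length = 3) : ∃ a b c, h = [a, b, c] := by
  match h, hl with
  | [a, b, c], _ => exact ⟨a, b, c, rfl⟩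

lemma build_aux {P : Int → Int → Int → Prop} :
    ∀ (hws : List (List Int)) (d : PySem.Dict Int (List (Int × Int))),
    (∀ h ∈ hws, h.length = 3 ∧ P (h.getD 0 0) (h.getD 1 0) (h.getD 2 0) ∧
      P (h.getD 1 0) (h.getD 0 0) (h.getD 2 0)) →
    (∀ u v toll, (v, toll) ∈ adjOf d u → P u v toll) →
    ∃ g, hws.foldl (fun og h =>
        og.bind fun g =>
          match h with
          | [u, v, c] => some ((g.modify u [] (· ++ [(v, c)])).modify v [] (· ++ [(u, c)]))
          | _ => none) (some d) = some g ∧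
      (∀ u v toll, (v, toll) ∈ adjOf g u → P u v toll) ∧
      ∀ u, (adjOf g u).length ≤ (adjOf d u).length + 2 * hws.length := by
  intro hws
  induction hws with
  | nil => intro d _ hd; exact ⟨d, rfl, hd, fun u => by simp⟩
  | cons h hws ih =>
    intro d hpre hd
    obtain ⟨hl, hP1, hP2⟩ := hpre h (by simp)
    obtain ⟨a, b, c, rfl⟩ := len3 hl
    have ha' : ([a, b, c] : List Int).getD 0 0 = a := rfl
    have hb' : ([a, b, c] : List Int).getD 1 0 = b := rfl
    have hc' : ([a, b, c] : List Int).getD 2 0 = c := rfl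
    rw [ha', hb', hc'] at hP1 hP2
    set d' := (d.modify a [] (· ++ [(b, c)])).modify b [] (· ++ [(a, c)]) with hd'
    have hgwf' : ∀ u v toll, (v, toll) ∈ adjOf d' u → P u v toll := by
      intro u v toll hm
      rw [hd', adjOf_modify] at hm
      split_ifs at hm with h1
      · subst h1
        rcases List.mem_append.mp hm with hm' | hm'
        · rw [adjOf_modify] at hm'
          split_ifs at hm' with h2
          · subst h2
            rcases List.mem_append.mp hm' with hm'' | hm''
            · exact hd _ _ _ hm''
            · simp at hm''
              rw [hm''.1, hm''.2]
              exact hP1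
          · exact hd _ _ _ hm'
        · simp at hm'
          rw [hm'.1, hm'.2]
          exact hP2
      · rw [adjOf_modify] at hm
        split_ifs at hm with h2
        · subst h2
          rcases List.mem_append.mp hm with hm'' | hm''
          · exact hd _ _ _ hm''
          · simp at hm''
            rw [hm''.1, hm''.2]
            exact hP1
        · exact hd _ _ _ hm
    have hlen' : ∀ u, (adjOf d' u).length ≤ (adjOf d u).length + 2 := by
      intro u
      rw [hd', adjOf_modify, adjOf_modify, adjOf_modify]
      split_ifs with h1 h2 h3 <;> subst_eqs <;> simp
    obtain ⟨g, hfold, hgwf, hlen⟩ := ih d' (fun h hh => hpre h (by simp [hh])) hgwf'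
    refine ⟨g, ?_, hgwf, ?_⟩
    · simpa using hfold
    · intro u
      have := hlen u
      have := hlen' u
      simp only [List.length_cons]
      omega

lemma build_props {n : Int} {highways : List (List Int)}
    (hlen3 : ∀ h ∈ highways, h.length = 3)
    (hpre : ∀ h ∈ highways, 0 ≤ h.getD 2 0 ∧
      (1 < n → (0 ≤ h.getD 0 0 ∧ h.getD 0 0 < n) ∧ (0 ≤ h.getD 1 0 ∧ h.getD 1 0 < n))) :
    ∃ g, buildGraphA highways = some g ∧ GWt g ∧ (1 < n → GWf n g) ∧
      ∀ u, (adjOf g u).length ≤ 2 * highways.length := by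
  have hempty : ∀ u v toll,
      (v, toll) ∈ adjOf (PySem.Dict.empty : PySem.Dict Int (List (Int × Int))) u →
      (0 ≤ toll ∧ (1 < n → 0 ≤ u ∧ u < n ∧ 0 ≤ v ∧ v < n)) := by
    intro u v toll hm
    simp [adjOf, PySem.Dict.getD, PySem.Dict.get?, PySem.Dict.empty] at hm
  obtain ⟨g, hfold, hgwf, hlen⟩ := build_aux
    (P := fun u v toll => 0 ≤ toll ∧ (1 < n → 0 ≤ u ∧ u < n ∧ 0 ≤ v ∧ v < n))
    highways PySem.Dict.empty
    (by
      intro h hh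
      obtain ⟨hc, hbounds⟩ := hpre h hh
      exact ⟨hlen3 h hh, ⟨hc, fun h2 => by have := hbounds h2; omega⟩,
        ⟨hc, fun h2 => by have := hbounds h2; omega⟩⟩)
    hempty
  refine ⟨g, hfold, ?_, ?_, fun u => ?_⟩
  · intro u v toll hm
    exact (hgwf u v toll hm).1
  · intro h2 u v toll hm
    obtain ⟨hc, hb⟩ := hgwf u v toll hm
    have := hb h2
    omega
  · have := hlen u
    simpa [adjOf, PySem.Dict.getD, PySem.Dict.get?, PySem.Dict.empty] using this

-- ---------- A side: popMin ----------

lemma eLeA_cost {a b} (h : eLeA a b = true) : a.1 ≤ b.1 := by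
  unfold eLeA at h
  simp at h
  rcases h with h | h
  · omega
  · omega

lemma eLeA_not_cost {a b} (h : eLeA a b = false) : b.1 ≤ a.1 := by
  unfold eLeA at h
  simp at h
  omega

lemma popMinA_perm (e : Int × Int × Int) (l : List (Int × Int × Int)) :
    (e :: l).Perm ((popMinA e l).1 :: (popMinA e l).2) := by
  induction l generalizing e with
  | nil => simp [popMinA]
  | cons x xs ih =>
    by_cases h : eLeA e x
    · simp only [popMinA, h, if_true]
      exact (List.Perm.swap x e xs).trans (((ih e).cons x).trans
        (List.Perm.swap (popMinA e xs).1 x (popMinA e xs).2))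
    · simp only [popMinA, h, if_false]
      exact ((ih x).cons e).trans (List.Perm.swap (popMinA x xs).1 e (popMinA x xs).2)

lemma popMinA_min (e : Int × Int × Int) (l : List (Int × Int × Int)) :
    ∀ y ∈ e :: l, (popMinA e l).1.1 ≤ y.1 := by
  induction l generalizing e with
  | nil => intro y hy; simp at hy; subst hy; simp [popMinA]
  | cons x xs ih =>
    intro y hy
    rcases List.mem_cons.mp hy with rfl | hy1
    · by_cases h : eLeA y x
      · simp only [popMinA, h, if_true]; exact ih y y (by simp)
      · simp only [popMinA, h, if_false]
        exact le_trans (ih x x (by simp)) (eLeA_not_cost (by simpa using h))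
    · rcases List.mem_cons.mp hy1 with rfl | hy2
      · by_cases h : eLeA e y
        · simp only [popMinA, h, if_true]
          exact le_trans (ih e e (by simp)) (eLeA_cost h)
        · simp only [popMinA, h, if_false]; exact ih y y (by simp)
      · by_cases h : eLeA e x
        · simp only [popMinA, h, if_true]; exact ih e y (by simp [hy2])
        · simp only [popMinA, h, if_false]; exact ih x y (by simp [hy2])

-- ---------- A side: visited array ----------

def VisA (vis : List (List Bool)) (s : Int × Int) : Prop := vgetA vis s.1 s.2 = some true

def ShapeV (n disc : Int) (vis : List (List Bool)) : Prop :=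
  vis.length = n.toNat ∧ ∀ row ∈ vis, row.length = (disc + 1).toNat

def falseCount (vis : List (List Bool)) : Nat :=
  (vis.map fun row => row.countP fun b => !b).sum

-- ---------- A side: invariant ----------

def InvA (n : Int) (g : PySem.Dict Int (List (Int × Int))) (disc : Int)
    (H : List (Int × Int × Int)) (vis : List (List Bool)) : Prop :=
  ShapeV n disc vis ∧
  (∀ e ∈ H, ReachP g disc (e.2.1, e.2.2) e.1) ∧
  (∀ d', 0 ≤ d' → d' ≤ disc → ¬ VisA vis (n - 1, d')) ∧
  ∃ lab : (Int × Int) → Int,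
    (∀ s t w, InBox n disc s → VisA vis s → EdgeP g s t w →
      (∃ e ∈ H, e.2 = t ∧ e.1 ≤ lab s + w) ∨ (VisA vis t ∧ lab t ≤ lab s + w)) ∧
    (∀ s, InBox n disc s → VisA vis s → ∀ e ∈ H, lab s ≤ e.1) ∧
    (¬ VisA vis (0, disc) → ∃ e ∈ H, e.2 = (0, disc) ∧ e.1 ≤ 0) ∧
    (VisA vis (0, disc) → lab (0, disc) ≤ 0)

lemma walk_claim {n disc : Int} {g : PySem.Dict Int (List (Int × Int))}
    {H : List (Int × Int × Int)} {vis : List (List Bool)} {lab : (Int × Int) → Int}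
    (hg : GWf n g) (hn : 0 < n) (hdisc : 0 ≤ disc)
    (hb : ∀ s t w, InBox n disc s → VisA vis s → EdgeP g s t w →
      (∃ e ∈ H, e.1 ≤ lab s + w) ∨ (VisA vis t ∧ lab t ≤ lab s + w))
    (hc : ¬ VisA vis (0, disc) → ∃ e ∈ H, e.2 = (0, disc) ∧ e.1 ≤ 0)
    (hd' : VisA vis (0, disc) → lab (0, disc) ≤ 0) :
    ∀ l t c, WFrom g (0, disc) t c l →
      (VisA vis t ∧ lab t ≤ c) ∨ ∃ e ∈ H, e.1 ≤ c := by
  have hs0 : InBox n disc (0, disc) := ⟨le_refl 0, hn, hdisc, le_refl disc⟩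
  intro l
  induction l using List.reverseRecOn with
  | nil =>
    intro t c h
    obtain ⟨rfl, rfl⟩ := wfrom_nil h
    by_cases hv : VisA vis (0, disc)
    · exact Or.inl ⟨hv, hd' hv⟩
    · obtain ⟨e, he, _, hle⟩ := hc hv
      exact Or.inr ⟨e, he, hle⟩
  | append_singleton l v ih =>
    intro t c h
    obtain ⟨rfl, c1, w, m, hw, he, rfl⟩ := wfrom_snoc h
    have hw0 : 0 ≤ w := edge_nonneg (gwf_gwt hg) he
    have hmbox : InBox n disc m := (wfrom_box hg hw hs0).1
    rcases ih m c1 hw with ⟨hvm, hlm⟩ | ⟨e, heH, hle⟩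
    · rcases hb m v w hmbox hvm he with ⟨e, heH, hle⟩ | ⟨hvt, hlt⟩
      · exact Or.inr ⟨e, heH, by omega⟩
      · exact Or.inl ⟨hvt, by omega⟩
    · exact Or.inr ⟨e, heH, by omega⟩


-- ---------- A side: indexing lemmas ----------

lemma pyIdx?_box {len : Nat} {i : Int} (h0 : 0 ≤ i) (hlt : i < (len : Int)) :
    PySem.List.pyIdx? len i = some i.toNat := by
  simp [PySem.List.pyIdx?, h0, hlt]

lemma pyIdx?_some_lt {len : Nat} {i : Int} {k : Nat}
    (h : PySem.List.pyIdx? len i = some k) : k < len := by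
  unfold PySem.List.pyIdx? at h
  split_ifs at h with h1 h2 h3 <;> injection h with h <;> omega

lemma pyGet?_set {α : Type} (l : List α) (kset : Nat) (hk : kset < l.length) (x : α) (b : Int) :
    PySem.List.pyGet? (l.set kset x) b =
      if PySem.List.pyIdx? l.length b = some kset then some x else PySem.List.pyGet? l b := by
  unfold PySem.List.pyGet?
  rw [List.length_set]
  cases hidx : PySem.List.pyIdx? l.length b with
  | none => simp
  | some k =>
    have hklt := pyIdx?_some_lt hidx
    by_cases he : k = kset
    · subst he; simp [List.getElem?_set, hk]
    · simp [List.getElem?_set, he, Ne.symm he, Option.some.injEq]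

lemma vgetA_box {n disc : Int} {vis : List (List Bool)} (hs : ShapeV n disc vis)
    {s : Int × Int} (hb : InBox n disc s) :
    ∃ (hi : s.1.toNat < vis.length) (hj : s.2.toNat < (vis[s.1.toNat]'(by omega)).length),
      vgetA vis s.1 s.2 = some ((vis[s.1.toNat]'(by omega))[s.2.toNat]'(by omega)) := by
  obtain ⟨hlen, hrows⟩ := hs
  obtain ⟨hb1, hb2, hb3, hb4⟩ := hb
  have hi : s.1.toNat < vis.length := by omega
  have hrow := hrows (vis[s.1.toNat]'hi) (List.getElem_mem hi)
  have hj : s.2.toNat < (vis[s.1.toNat]'hi).length := by omega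
  refine ⟨hi, hj, ?_⟩
  unfold vgetA PySem.List.pyGet?
  rw [pyIdx?_box hb1 (by omega)]
  simp only [Option.bind_some, List.getElem?_eq_getElem hi, Option.bind_some]
  rw [pyIdx?_box hb3 (by omega)]
  simp [List.getElem?_eq_getElem hj]

/-- `visited[city][d] = True` for an in-box state. -/
def SetVis (vis : List (List Bool)) (s : Int × Int) : List (List Bool) :=
  vis.set s.1.toNat ((vis.getD s.1.toNat []).set s.2.toNat true)

lemma vsetA_box {n disc : Int} {vis : List (List Bool)} (hs : ShapeV n disc vis)
    {s : Int × Int} (hb : InBox n disc s) :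
    vsetA vis s.1 s.2 = some (SetVis vis s) := by
  obtain ⟨hlen, hrows⟩ := hs
  obtain ⟨hb1, hb2, hb3, hb4⟩ := hb
  have hi : s.1.toNat < vis.length := by omega
  have hrow := hrows (vis[s.1.toNat]'hi) (List.getElem_mem hi)
  unfold vsetA PySem.List.pyGet? PySem.List.pySet?
  rw [pyIdx?_box hb1 (by omega)]
  simp only [Option.bind_some, List.getElem?_eq_getElem hi]
  rw [pyIdx?_box hb3 (by omega)]
  simp [SetVis, List.getD, List.getElem?_eq_getElem hi]

lemma shapeV_set {n disc : Int} {vis : List (List Bool)} (hs : ShapeV n disc vis)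
    {s : Int × Int} : ShapeV n disc (SetVis vis s) := by
  obtain ⟨hlen, hrows⟩ := hs
  constructor
  · rw [SetVis, List.length_set, hlen]
  · intro row hrow
    rcases List.mem_or_eq_of_mem_set hrow with h | h
    · exact hrows row h
    · subst h
      rw [List.length_set]
      by_cases hi : s.1.toNat < vis.length
      · rw [List.getD_eq_getElem vis [] hi]
        exact hrows _ (List.getElem_mem hi)
      · -- out of range: the whole update is a no-op on the [] default row
        have hnoop : SetVis vis s = vis := by
          rw [SetVis, List.set_eq_of_length_le (by omega)]
        have hgd : vis.getD s.1.toNat [] = [] := by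
          rw [List.getD_eq_default]
          omega
        have hrow' : ([] : List Bool) ∈ vis := by
          have h0 := hrow
          rw [hnoop] at h0
          rwa [hgd, List.set_nil] at h0
        rw [hgd]
        exact hrows [] hrow'

lemma visA_mono {n disc : Int} {vis : List (List Bool)} (hs : ShapeV n disc vis)
    {sp : Int × Int} (hspb : InBox n disc sp) :
    ∀ s', VisA vis s' → VisA (SetVis vis sp) s' := by
  obtain ⟨hlen, hrows⟩ := hs
  have hi : sp.1.toNat < vis.length := by obtain ⟨a, b, c, d⟩ := hspb; omega
  intro s' hv
  unfold VisA vgetA at hv ⊢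
  rw [SetVis, pyGet?_set vis sp.1.toNat hi]
  split_ifs with hidx
  · -- s' reads the modified row
    have : PySem.List.pyGet? vis s'.1 = some (vis[sp.1.toNat]'hi) := by
      unfold PySem.List.pyGet?
      rw [hidx]
      simp [List.getElem?_eq_getElem hi]
    rw [this] at hv
    simp only [Option.bind_some] at hv ⊢
    rw [List.getD_eq_getElem vis [] hi]
    rw [pyGet?_set]
    · split_ifs with hj
      · rfl
      · exact hv
    · have := hrows _ (List.getElem_mem hi)
      obtain ⟨a, b, c, d⟩ := hspb; omega
  · exact hv

lemma visA_self {n disc : Int} {vis : List (List Bool)} (hs : ShapeV n disc vis)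
    {sp : Int × Int} (hspb : InBox n disc sp) : VisA (SetVis vis sp) sp := by
  have hs' := shapeV_set (s := sp) hs
  obtain ⟨hi, hj, hget⟩ := vgetA_box hs' hspb
  rw [VisA, hget]
  congr 1
  simp [SetVis, List.getElem_set]

lemma visA_new {n disc : Int} {vis : List (List Bool)} (hs : ShapeV n disc vis)
    {sp : Int × Int} (hspb : InBox n disc sp) :
    ∀ s', InBox n disc s' → VisA (SetVis vis sp) s' → VisA vis s' ∨ s' = sp := by
  obtain ⟨hlen, hrows⟩ := hs
  obtain ⟨hp1, hp2, hp3, hp4⟩ := hspb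
  have hi : sp.1.toNat < vis.length := by omega
  have hrowlen := hrows _ (List.getElem_mem hi)
  intro s' hb' hv
  obtain ⟨hq1, hq2, hq3, hq4⟩ := hb'
  unfold VisA vgetA at hv ⊢
  rw [SetVis, pyGet?_set vis sp.1.toNat hi] at hv
  rw [pyIdx?_box hq1 (by omega)] at hv
  split_ifs at hv with hidx
  · -- same row: s'.1 = sp.1
    have hrow1 : s'.1 = sp.1 := by
      injection hidx with h; omega
    rw [List.getD_eq_getElem vis [] hi] at hv
    simp only [Option.bind_some] at hv
    rw [pyGet?_set _ sp.2.toNat (by omega)] at hv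
    rw [pyIdx?_box hq3 (by omega)] at hv
    split_ifs at hv with hj
    · right
      have : s'.2 = sp.2 := by injection hj with h; omega
      exact Prod.ext hrow1 this
    · left
      have houter : PySem.List.pyGet? vis s'.1 = some (vis[sp.1.toNat]'hi) := by
        unfold PySem.List.pyGet?
        rw [pyIdx?_box hq1 (by omega)]
        simp only [Option.bind_some]
        rw [List.getElem?_eq_getElem (by omega : s'.1.toNat < vis.length)]
        simp only [show s'.1.toNat = sp.1.toNat from by omega]
      rw [houter]
      simpa using hv
  · left; exact hv

-- ---------- A side: falseCount ----------

lemma countP_set_true (row : List Bool) (j : Nat) (hj : j < row.length)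
    (hf : row[j] = false) :
    (row.set j true).countP (fun b => !b) + 1 = row.countP (fun b => !b) := by
  induction row generalizing j with
  | nil => simp at hj
  | cons x xs ih =>
    cases j with
    | zero =>
      simp only [List.getElem_cons_zero] at hf
      subst hf
      simp [List.countP_cons]
    | succ j =>
      simp only [List.length_cons, Nat.add_lt_add_iff_right] at hj
      simp only [List.getElem_cons_succ] at hf
      have := ih j hj hf
      simp only [List.set_cons_succ, List.countP_cons]
      split_ifs <;> omega

lemma falseCount_set (vis : List (List Bool)) (i : Nat) (row' : List Bool)
    (hi : i < vis.length)
    (hrow : row'.countP (fun b => !b) + 1 = (vis[i]'hi).countP (fun b => !b)) :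
    falseCount (vis.set i row') + 1 = falseCount vis := by
  induction vis generalizing i with
  | nil => simp at hi
  | cons r rs ih =>
    cases i with
    | zero =>
      simp only [List.getElem_cons_zero] at hrow
      simp [falseCount, List.set_cons_zero]
      omega
    | succ i =>
      simp only [List.length_cons, Nat.add_lt_add_iff_right] at hi
      simp only [List.getElem_cons_succ] at hrow
      have := ih i hi hrow
      simp only [List.set_cons_succ, falseCount, List.map_cons, List.sum_cons] at this ⊢
      omega

lemma falseCount_setVis {n disc : Int} {vis : List (List Bool)} (hs : ShapeV n disc vis)
    {sp : Int × Int} (hspb : InBox n disc sp)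
    (hf : vgetA vis sp.1 sp.2 = some false) :
    falseCount (SetVis vis sp) + 1 = falseCount vis := by
  obtain ⟨hi, hj, hget⟩ := vgetA_box hs hspb
  rw [hget] at hf
  injection hf with hf
  rw [SetVis, List.getD_eq_getElem vis [] hi]
  exact falseCount_set vis sp.1.toNat _ hi (countP_set_true _ _ hj hf)

-- ---------- A side: pushes ----------

lemma mem_pushesA {g : PySem.Dict Int (List (Int × Int))} {cost u d : Int}
    {e' : Int × Int × Int} :
    e' ∈ pushesA g cost u d ↔ ∃ v toll, (v, toll) ∈ adjOf g u ∧
      (e' = (cost + toll, v, d) ∨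
        (0 < d ∧ e' = (cost + PySem.Int.floordiv toll 2, v, d - 1))) := by
  rw [pushesA, List.mem_flatMap]
  constructor
  · rintro ⟨p, hp, hmem⟩
    rcases List.mem_cons.mp hmem with rfl | h2
    · exact ⟨p.1, p.2, hp, Or.inl rfl⟩
    · by_cases hd : 0 < d
      · simp only [if_pos hd, List.mem_singleton] at h2
        exact ⟨p.1, p.2, hp, Or.inr ⟨hd, h2⟩⟩
      · simp [if_neg hd] at h2
  · rintro ⟨v, toll, hvt, rfl | ⟨hd, rfl⟩⟩
    · exact ⟨(v, toll), hvt, by simp⟩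
    · exact ⟨(v, toll), hvt, by simp [hd]⟩

lemma edge_push {g : PySem.Dict Int (List (Int × Int))} {cost u d : Int}
    {t : Int × Int} {w : Int} (he : EdgeP g (u, d) t w) :
    (cost + w, t.1, t.2) ∈ pushesA g cost u d := by
  cases he with
  | full hm => exact mem_pushesA.mpr ⟨_, _, hm, Or.inl rfl⟩
  | half hm hd => exact mem_pushesA.mpr ⟨_, _, hm, Or.inr ⟨hd, rfl⟩⟩

lemma push_edge {g : PySem.Dict Int (List (Int × Int))} {cost u d : Int}
    {e' : Int × Int × Int} (hm : e' ∈ pushesA g cost u d) :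
    ∃ w, EdgeP g (u, d) (e'.2.1, e'.2.2) w ∧ e'.1 = cost + w := by
  rcases mem_pushesA.mp hm with ⟨v, toll, hvt, rfl | ⟨hd, rfl⟩⟩
  · exact ⟨toll, EdgeP.full hvt, rfl⟩
  · exact ⟨_, EdgeP.half hvt hd, rfl⟩

lemma push_sound {n g disc : _} {cost u d : Int} {e' : Int × Int × Int}
    (hg : GWf n g) (hr : ReachP g disc (u, d) cost)
    (hm : e' ∈ pushesA g cost u d) : ReachP g disc (e'.2.1, e'.2.2) e'.1 := by
  obtain ⟨w, he, hcost⟩ := push_edge hm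
  rw [hcost]
  exact reach_step hr he

lemma push_cost {n : Int} {g : PySem.Dict Int (List (Int × Int))} {cost u d : Int}
    {e' : Int × Int × Int} (hg : GWf n g) (hm : e' ∈ pushesA g cost u d) :
    cost ≤ e'.1 := by
  obtain ⟨w, he, hcost⟩ := push_edge hm
  have := edge_nonneg (gwf_gwt hg) he
  omega

lemma pushes_len {g : PySem.Dict Int (List (Int × Int))} (cost u d : Int) :
    (pushesA g cost u d).length ≤ 2 * (adjOf g u).length := by
  rw [pushesA]
  show ((adjOf g u).flatMap _).length ≤ _
  induction adjOf g u with
  | nil => simp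
  | cons p ps ih =>
    rw [List.flatMap_cons, List.length_append, List.length_cons]
    split_ifs <;> simp_all <;> omega

-- ---------- A side: invariant maintenance ----------

lemma mem_of_perm_ne {α : Type} {H R : List α} {p e : α} (hperm : H.Perm (p :: R))
    (he : e ∈ H) (hne : e ≠ p) : e ∈ R := by
  rcases List.mem_cons.mp (hperm.mem_iff.mp he) with h | h
  · exact absurd h hne
  · exact h

lemma invA_pop_visited {n disc : Int} {g : PySem.Dict Int (List (Int × Int))}
    {H R : List (Int × Int × Int)} {p : Int × Int × Int} {vis : List (List Bool)}
    (hg : GWf n g)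
    (hperm : H.Perm (p :: R))
    (hvis : VisA vis (p.2.1, p.2.2))
    (hInv : InvA n g disc H vis) : InvA n g disc R vis := by
  obtain ⟨hs, hsound, htarget, lab, hb, hc, hd, hd'⟩ := hInv
  have hsub : ∀ e ∈ R, e ∈ H := fun e he => hperm.mem_iff.mpr (by simp [he])
  have hpH : p ∈ H := hperm.mem_iff.mpr (by simp)
  refine ⟨hs, fun e he => hsound e (hsub e he), htarget, lab, ?_, ?_, ?_, hd'⟩
  · intro s t w hbox hv he
    rcases hb s t w hbox hv he with ⟨e, heH, het, hle⟩ | hfall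
    · by_cases hep : e = p
      · subst hep
        have hvt : VisA vis t := by
          have h0 : VisA vis e.2 := hvis
          rwa [het] at h0
        have htbox : InBox n disc t := edge_box hg he hbox
        have hlt : lab t ≤ e.1 := hc t htbox hvt e heH
        exact Or.inr ⟨hvt, by omega⟩
      · exact Or.inl ⟨e, mem_of_perm_ne hperm heH hep, het, hle⟩
    · exact Or.inr hfall
  · intro s hbox hv e he
    exact hc s hbox hv e (hsub e he)
  · intro hnv
    obtain ⟨e, heH, het, hle⟩ := hd hnv
    have hep : e ≠ p := by
      intro h
      subst h
      apply hnv
      have h0 : VisA vis e.2 := hvis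
      rwa [het] at h0
    exact ⟨e, mem_of_perm_ne hperm heH hep, het, hle⟩

lemma invA_expand {n disc : Int} {g : PySem.Dict Int (List (Int × Int))}
    {H R : List (Int × Int × Int)} {p : Int × Int × Int} {vis : List (List Bool)}
    (hg : GWf n g) (hn : 0 < n) (hdisc : 0 ≤ disc)
    (hperm : H.Perm (p :: R)) (hmin : ∀ y ∈ H, p.1 ≤ y.1)
    (hnotvis : vgetA vis p.2.1 p.2.2 = some false)
    (hnt : p.2.1 ≠ n - 1)
    (hInv : InvA n g disc H vis) :
    InvA n g disc (R ++ pushesA g p.1 p.2.1 p.2.2) (SetVis vis (p.2.1, p.2.2)) := by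
  obtain ⟨hs, hsound, htarget, lab, hb, hc, hd, hd'⟩ := hInv
  have hpH : p ∈ H := hperm.mem_iff.mpr (by simp)
  have hreach : ReachP g disc (p.2.1, p.2.2) p.1 := hsound p hpH
  have hspbox : InBox n disc (p.2.1, p.2.2) := by
    obtain ⟨l, hw⟩ := hreach
    exact (wfrom_box hg hw ⟨le_refl 0, hn, hdisc, le_refl disc⟩).1
  have hm1 := visA_mono hs hspbox
  have hm3 := visA_self hs hspbox
  have hm2 := visA_new hs hspbox
  have hspnv : ¬ VisA vis (p.2.1, p.2.2) := by
    rw [VisA]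
    simp only [hnotvis]
    simp
  have hsub : ∀ e ∈ R, e ∈ H := fun e he => hperm.mem_iff.mpr (by simp [he])
  refine ⟨shapeV_set hs, ?_, ?_, ?_⟩
  · -- soundness
    intro e he
    rcases List.mem_append.mp he with h | h
    · exact hsound e (hsub e h)
    · exact push_sound hg hreach h
  · -- target never visited
    intro d' h0 h1 hv'
    rcases hm2 (n - 1, d') ⟨by omega, by omega, h0, h1⟩ hv' with hvold | heq
    · exact htarget d' h0 h1 hvold
    · have : p.2.1 = n - 1 := by
        have := congrArg Prod.fst heq
        simpa using this.symm
      exact hnt this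
  · -- labelling
    refine ⟨fun s => if vgetA vis s.1 s.2 = some true then lab s else p.1, ?_, ?_, ?_, ?_⟩
    · intro s t w hbox hv' he
      simp only []
      rcases hm2 s hbox hv' with hvold | rfl
      · rw [if_pos (show vgetA vis s.1 s.2 = some true from hvold)]
        rcases hb s t w hbox hvold he with ⟨e, heH, het, hle⟩ | ⟨hvt, hlt⟩
        · by_cases hep : e = p
          · subst hep
            refine Or.inr ⟨by rw [← het]; exact hm3, ?_⟩
            rw [← het, if_neg (show ¬ (vgetA vis e.2.1 e.2.2 = some true) from hspnv)]
            exact hle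
          · exact Or.inl ⟨e, List.mem_append_left _ (mem_of_perm_ne hperm heH hep), het, hle⟩
        · exact Or.inr ⟨hm1 t hvt,
            by rw [if_pos (show vgetA vis t.1 t.2 = some true from hvt)]; exact hlt⟩
      · -- s = popped state, newly visited
        rw [if_neg (show ¬ (vgetA vis p.2.1 p.2.2 = some true) from hspnv)]
        have hpush := edge_push (cost := p.1) he
        exact Or.inl ⟨(p.1 + w, t.1, t.2), List.mem_append_right _ hpush, rfl, le_refl _⟩
    · intro s hbox hv' e he
      simp only []
      have hecost : p.1 ≤ e.1 := by
        rcases List.mem_append.mp he with h | h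
        · exact hmin e (hsub e h)
        · exact push_cost hg h
      rcases hm2 s hbox hv' with hvold | rfl
      · rw [if_pos (show vgetA vis s.1 s.2 = some true from hvold)]
        rcases List.mem_append.mp he with h | h
        · exact hc s hbox hvold e (hsub e h)
        · have := hc s hbox hvold p hpH
          have := push_cost hg h
          omega
      · rw [if_neg (show ¬ (vgetA vis p.2.1 p.2.2 = some true) from hspnv)]
        exact hecost
    · intro hnv'
      have hnv : ¬ VisA vis (0, disc) := fun h => hnv' (hm1 _ h)
      obtain ⟨e, heH, het, hle⟩ := hd hnv
      have hep : e ≠ p := by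
        intro h
        subst h
        apply hnv'
        rw [← het]
        exact hm3
      exact ⟨e, List.mem_append_left _ (mem_of_perm_ne hperm heH hep), het, hle⟩
    · intro hv'
      simp only []
      rcases hm2 (0, disc) ⟨le_refl 0, hn, hdisc, le_refl disc⟩ hv' with hvold | heq
      · rw [if_pos (show vgetA vis (0, disc).1 (0, disc).2 = some true from hvold)]
        exact hd' hvold
      · have hnv : ¬ VisA vis (0, disc) := fun h => hspnv (heq ▸ h)
        rw [if_neg (show ¬ (vgetA vis (0, disc).1 (0, disc).2 = some true) from hnv)]
        obtain ⟨e, heH, het, hle⟩ := hd hnv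
        have := hmin e heH
        omega

-- ---------- A side: the main loop ----------

lemma loopA_good {n disc : Int} {g : PySem.Dict Int (List (Int × Int))} {L : Nat}
    (hg : GWf n g) (hn : 0 < n) (hdisc : 0 ≤ disc)
    (hlen : ∀ u, (adjOf g u).length ≤ 2 * L) :
    ∀ (fuel : Nat) (H : List (Int × Int × Int)) (vis : List (List Bool)),
      InvA n g disc H vis →
      falseCount vis * (4 * L + 2) + H.length < fuel →
      GoodR n g disc (loopA n g fuel H vis) := by
  intro fuel
  induction fuel with
  | zero => intro H vis _ hμ; exact absurd hμ (by omega)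
  | succ fuel ih =>
    intro H vis hInv hμ
    cases H with
    | nil =>
      -- heap exhausted: nothing reachable at the target
      obtain ⟨hs, hsound, htarget, lab, hb, hc, hd, hd'⟩ := hInv
      refine Or.inr ⟨by simp [loopA], ?_⟩
      intro x d hreach
      obtain ⟨l, hw⟩ := hreach
      have hbox := (wfrom_box hg hw ⟨le_refl 0, hn, hdisc, le_refl disc⟩).1
      have := walk_claim hg hn hdisc
        (fun s t w hbox hv he => (hb s t w hbox hv he).imp
          (fun ⟨e, heH, _, hle⟩ => ⟨e, heH, hle⟩) id) hd hd' l _ x hw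
      rcases this with ⟨hvt, _⟩ | ⟨e, he, _⟩
      · exact htarget d hbox.2.2.1 hbox.2.2.2 hvt
      · simp at he
    | cons e rest =>
      have hperm := popMinA_perm e rest
      have hminp := popMinA_min e rest
      set pr := popMinA e rest with hpr
      have hpH : pr.1 ∈ e :: rest := hperm.symm.subset (by simp)
      obtain ⟨hs, hsound, htarget, lab, hb, hc, hd, hd'⟩ := hInv
      have hreach : ReachP g disc (pr.1.2.1, pr.1.2.2) pr.1.1 := hsound pr.1 hpH
      have hspbox : InBox n disc (pr.1.2.1, pr.1.2.2) := by
        obtain ⟨l, hw⟩ := hreach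
        exact (wfrom_box hg hw ⟨le_refl 0, hn, hdisc, le_refl disc⟩).1
      have hInv' : InvA n g disc (e :: rest) vis := ⟨hs, hsound, htarget, lab, hb, hc, hd, hd'⟩
      show GoodR n g disc (loopA n g (fuel + 1) (e :: rest) vis)
      rw [loopA]
      by_cases hcity : pr.1.2.1 = n - 1
      · rw [if_pos hcity]
        -- popped the target: its cost is the least target cost
        refine Or.inl ⟨⟨pr.1.2.2, by rw [← hcity]; exact hreach⟩, ?_⟩
        intro x d hreach'
        obtain ⟨l, hw⟩ := hreach'
        have := walk_claim hg hn hdisc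
          (fun s t w hbox hv he => (hb s t w hbox hv he).imp
            (fun ⟨e', heH, _, hle⟩ => ⟨e', heH, hle⟩) id) hd hd' l _ x hw
        have hbox := (wfrom_box hg hw ⟨le_refl 0, hn, hdisc, le_refl disc⟩).1
        rcases this with ⟨hvt, _⟩ | ⟨e', he', hle⟩
        · exact absurd hvt (htarget d hbox.2.2.1 hbox.2.2.2)
        · have hE := hminp e' he'
          rw [hpr] at hE
          omega
      · rw [if_neg hcity]
        obtain ⟨hi, hj, hvget⟩ := vgetA_box hs hspbox
        rw [hvget]
        by_cases hcell : (vis[pr.1.2.1.toNat]'(by omega))[pr.1.2.2.toNat]'(by omega) = true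
        · rw [hcell]
          show GoodR n g disc (loopA n g fuel pr.2 vis)
          apply ih
          · exact invA_pop_visited hg hperm (by rw [VisA, hvget, hcell]) hInv'
          · have hlenr : pr.2.length + 1 = rest.length + 1 := by
              have := hperm.length_eq
              simpa using this.symm
            simp only [List.length_cons] at hμ
            omega
        · rw [Bool.not_eq_true] at hcell
          rw [hcell]
          have hvfalse : vgetA vis pr.1.2.1 pr.1.2.2 = some false := by rw [hvget, hcell]
          rw [vsetA_box hs hspbox]
          show GoodR n g disc (loopA n g fuel (pr.2 ++ pushesA g pr.1.1 pr.1.2.1 pr.1.2.2) _)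
          apply ih
          · exact invA_expand hg hn hdisc hperm hminp hvfalse hcity hInv'
          · -- the measure decreases
            have hfc : falseCount (SetVis vis (pr.1.2.1, pr.1.2.2)) + 1 = falseCount vis :=
              falseCount_setVis hs hspbox hvfalse
            have hlenr : pr.2.length + 1 = rest.length + 1 := by
              have := hperm.length_eq
              simpa using this.symm
            have hpl : (pushesA g pr.1.1 pr.1.2.1 pr.1.2.2).length ≤ 2 * (adjOf g pr.1.2.1).length :=
              pushes_len _ _ _
            have hal := hlen pr.1.2.1
            have hmul : falseCount vis * (4 * L + 2)
                = falseCount (SetVis vis (pr.1.2.1, pr.1.2.2)) * (4 * L + 2) + (4 * L + 2) := by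
              rw [← hfc]; ring
            simp only [List.length_cons, List.length_append] at hμ ⊢
            omega

-- ---------- A side: top-level ----------

lemma countP_not_replicate_false (b : Nat) :
    (List.replicate b false).countP (fun x => !x) = b := by
  induction b with
  | zero => simp
  | succ b ih => simp [List.replicate_succ, List.countP_cons, ih]

lemma falseCount_replicate (a b : Nat) :
    falseCount (List.replicate a (List.replicate b false)) = a * b := by
  rw [falseCount, List.map_replicate, countP_not_replicate_false, List.sum_replicate]
  simp [Nat.smul_one_eq_cast]

lemma vgetA_replicate {a b : Nat} {x y : Int} :
    vgetA (List.replicate a (List.replicate b false)) x y ≠ some true := by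
  unfold vgetA PySem.List.pyGet?
  cases h1 : PySem.List.pyIdx? (List.replicate a (List.replicate b false)).length x with
  | none => simp
  | some k =>
    have := pyIdx?_some_lt h1
    simp only [List.length_replicate] at this
    simp only [Option.bind_some, List.getElem?_replicate, if_pos this, Option.bind_some]
    cases h2 : PySem.List.pyIdx? (List.replicate b false).length y with
    | none => simp
    | some k2 =>
      have := pyIdx?_some_lt h2
      simp only [List.length_replicate] at this
      simp [List.getElem?_replicate, if_pos this]

lemma minimumCost_good {n : Int} {highways : List (List Int)} {disc : Int}
    {g : PySem.Dict Int (List (Int × Int))}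
    (hbuild : buildGraphA highways = some g)
    (hg : GWf n g) (hlen : ∀ u, (adjOf g u).length ≤ 2 * highways.length)
    (hn : 0 < n) (hdisc : 0 ≤ disc) :
    GoodR n g disc (minimumCost n highways disc) := by
  rw [minimumCost, hbuild]
  apply loopA_good hg hn hdisc hlen
  · -- initial invariant
    refine ⟨⟨by simp, by intro row hr; simp at hr; simp [hr.2]⟩, ?_, ?_, ?_⟩
    · intro e he
      simp only [List.mem_singleton] at he
      subst he
      exact ⟨[], WFrom.refl _⟩
    · intro d' _ _ hv
      exact vgetA_replicate hv
    · refine ⟨fun _ => 0, ?_, ?_, ?_, ?_⟩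
      · intro s t w _ hv
        exact absurd hv vgetA_replicate
      · intro s _ hv
        exact absurd hv vgetA_replicate
      · intro _
        exact ⟨(0, 0, disc), by simp, rfl, le_refl 0⟩
      · intro hv
        exact absurd hv vgetA_replicate
  · -- fuel is enough
    rw [falseCount_replicate]
    have : (n.toNat * (disc + 1).toNat + 1) * (4 * highways.length + 2)
        = n.toNat * (disc + 1).toNat * (4 * highways.length + 2) + (4 * highways.length + 2) := by
      ring
    simp only [List.length_singleton]
    omega


-- ---------- B side: dictionary lemmas ----------

lemma dget_mem {κ ν : Type} [BEq κ] [LawfulBEq κ] {d : PySem.Dict κ ν} {k : κ} {v : ν}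
    (h : d.get? k = some v) : (k, v) ∈ d.items := by
  unfold PySem.Dict.get? at h
  cases hf : List.find? (fun p => p.1 == k) d.items with
  | none => rw [hf] at h; simp at h
  | some p =>
    rw [hf] at h
    simp only [Option.map_some, Option.some.injEq] at h
    have hmem := List.mem_of_find?_eq_some hf
    have hkey := List.find?_some hf
    simp only [beq_iff_eq] at hkey
    have : (k, v) = p := by
      rw [← hkey, ← h]
    rw [this]
    exact hmem

lemma mem_items_insert {κ ν : Type} [BEq κ] [LawfulBEq κ] {d : PySem.Dict κ ν} {k : κ} {v : ν}
    {p : κ × ν} (h : p ∈ (d.insert k v).items) : p = (k, v) ∨ p ∈ d.items := by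
  unfold PySem.Dict.insert at h
  split_ifs at h with hc
  · simp only [List.mem_map] at h
    obtain ⟨q, hq, hqe⟩ := h
    by_cases hqk : (q.1 == k) = true
    · rw [if_pos hqk] at hqe; exact Or.inl hqe.symm
    · rw [if_neg hqk] at hqe; exact Or.inr (hqe ▸ hq)
  · rcases List.mem_append.mp h with h | h
    · exact Or.inr h
    · simp at h; exact Or.inl h

/-- later dictionaries are pointwise no larger, on a no-smaller domain. -/
def DMono (d1 d2 : PySem.Dict (Int × Int) Int) : Prop :=
  ∀ s c, d1.get? s = some c → ∃ c' ≤ c, d2.get? s = some c'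

lemma dmono_refl (d : PySem.Dict (Int × Int) Int) : DMono d d :=
  fun s c h => ⟨c, le_refl c, h⟩

lemma dmono_trans {d1 d2 d3 : PySem.Dict (Int × Int) Int} (h1 : DMono d1 d2)
    (h2 : DMono d2 d3) : DMono d1 d3 := by
  intro s c h
  obtain ⟨c', hle, hg⟩ := h1 s c h
  obtain ⟨c'', hle', hg'⟩ := h2 s c' hg
  exact ⟨c'', by omega, hg'⟩

-- ---------- B side: relax1B / relaxStepB ----------

lemma relax1B_none {dist : PySem.Dict (Int × Int) Int} {key : Int × Int} (val : Int)
    (ch : Bool) (h : dist.get? key = none) :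
    relax1B dist key val ch = (dist.insert key val, true) := by
  unfold relax1B; rw [h]

lemma relax1B_some {dist : PySem.Dict (Int × Int) Int} {key : Int × Int} {cur : Int} (val : Int)
    (ch : Bool) (h : dist.get? key = some cur) :
    relax1B dist key val ch =
      if val < cur then (dist.insert key val, true) else (dist, ch) := by
  unfold relax1B; rw [h]

lemma relax1B_items {dist : PySem.Dict (Int × Int) Int} {key : Int × Int} {val : Int}
    {ch : Bool} {p : (Int × Int) × Int} (h : p ∈ (relax1B dist key val ch).1.items) :
    p = (key, val) ∨ p ∈ dist.items := by
  cases hg : dist.get? key with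
  | none => rw [relax1B_none val ch hg] at h; exact mem_items_insert h
  | some cur =>
    rw [relax1B_some val ch hg] at h
    split_ifs at h
    · exact mem_items_insert h
    · exact Or.inr h

lemma relax1B_mono {dist : PySem.Dict (Int × Int) Int} (key : Int × Int) (val : Int)
    (ch : Bool) : DMono dist (relax1B dist key val ch).1 := by
  intro s c h
  cases hg : dist.get? key with
  | none =>
    rw [relax1B_none val ch hg]
    by_cases hsk : s = key
    · subst hsk; rw [hg] at h; simp at h
    · rw [PySem.Dict.get?_insert_of_ne _ _ hsk]
      exact ⟨c, le_refl c, h⟩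
  | some cur =>
    rw [relax1B_some val ch hg]
    split_ifs with hlt
    · by_cases hsk : s = key
      · subst hsk
        rw [hg] at h
        injection h with h
        subst h
        exact ⟨val, by omega, PySem.Dict.get?_insert_self _ _ _⟩
      · rw [PySem.Dict.get?_insert_of_ne _ _ hsk]
        exact ⟨c, le_refl c, h⟩
    · exact ⟨c, le_refl c, h⟩

lemma relax1B_cover {dist : PySem.Dict (Int × Int) Int} (key : Int × Int) (val : Int)
    (ch : Bool) : ∃ c' ≤ val, (relax1B dist key val ch).1.get? key = some c' := by
  cases hg : dist.get? key with
  | none =>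
    rw [relax1B_none val ch hg]
    exact ⟨val, le_refl val, PySem.Dict.get?_insert_self _ _ _⟩
  | some cur =>
    rw [relax1B_some val ch hg]
    split_ifs with hlt
    · exact ⟨val, le_refl val, PySem.Dict.get?_insert_self _ _ _⟩
    · exact ⟨cur, by omega, hg⟩

lemma relax1B_false {dist : PySem.Dict (Int × Int) Int} {key : Int × Int} {val : Int}
    {ch : Bool} (h : (relax1B dist key val ch).2 = false) :
    (relax1B dist key val ch).1 = dist ∧ ch = false := by
  cases hg : dist.get? key with
  | none => rw [relax1B_none val ch hg] at h ⊢; simp at h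
  | some cur =>
    rw [relax1B_some val ch hg] at h ⊢
    split_ifs at h ⊢ with hlt
    all_goals simp_all

lemma relaxStepB_items {acc : PySem.Dict (Int × Int) Int × Bool} {cd : Int × Int} {c : Int}
    {p : Int × Int} {q : (Int × Int) × Int} (h : q ∈ (relaxStepB acc cd c p).1.items) :
    q ∈ acc.1.items ∨ q = ((p.1, cd.2), c + p.2) ∨
      (0 < cd.2 ∧ q = ((p.1, cd.2 - 1), c + PySem.Int.floordiv p.2 2)) := by
  unfold relaxStepB at h
  split_ifs at h with hd
  · rcases relax1B_items h with h1 | h1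
    · exact Or.inr (Or.inr ⟨hd, h1⟩)
    · rcases relax1B_items h1 with h2 | h2
      · exact Or.inr (Or.inl h2)
      · exact Or.inl h2
  · rcases relax1B_items h with h1 | h1
    · exact Or.inr (Or.inl h1)
    · exact Or.inl h1

lemma relaxStepB_mono (acc : PySem.Dict (Int × Int) Int × Bool) (cd : Int × Int) (c : Int)
    (p : Int × Int) : DMono acc.1 (relaxStepB acc cd c p).1 := by
  unfold relaxStepB
  split_ifs with hd
  · exact dmono_trans (relax1B_mono _ _ _) (relax1B_mono _ _ _)
  · exact relax1B_mono _ _ _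

lemma relaxStepB_cover1 (acc : PySem.Dict (Int × Int) Int × Bool) (cd : Int × Int) (c : Int)
    (p : Int × Int) :
    ∃ c' ≤ c + p.2, (relaxStepB acc cd c p).1.get? (p.1, cd.2) = some c' := by
  unfold relaxStepB
  split_ifs with hd
  · obtain ⟨c', hle, hg⟩ := relax1B_cover (dist := acc.1) (p.1, cd.2) (c + p.2) acc.2
    obtain ⟨c'', hle', hg'⟩ := relax1B_mono (dist := (relax1B acc.1 (p.1, cd.2) (c + p.2) acc.2).1)
      (p.1, cd.2 - 1) (c + PySem.Int.floordiv p.2 2) _ _ _ hg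
    exact ⟨c'', by omega, hg'⟩
  · exact relax1B_cover _ _ _

lemma relaxStepB_cover2 (acc : PySem.Dict (Int × Int) Int × Bool) (cd : Int × Int) (c : Int)
    (p : Int × Int) (hd : 0 < cd.2) :
    ∃ c' ≤ c + PySem.Int.floordiv p.2 2,
      (relaxStepB acc cd c p).1.get? (p.1, cd.2 - 1) = some c' := by
  unfold relaxStepB
  rw [if_pos hd]
  exact relax1B_cover _ _ _

lemma relaxStepB_false {acc : PySem.Dict (Int × Int) Int × Bool} {cd : Int × Int} {c : Int}
    {p : Int × Int} (h : (relaxStepB acc cd c p).2 = false) :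
    (relaxStepB acc cd c p).1 = acc.1 ∧ acc.2 = false := by
  unfold relaxStepB at h ⊢
  split_ifs at h ⊢ with hd
  · obtain ⟨h1, h2⟩ := relax1B_false h
    obtain ⟨h3, h4⟩ := relax1B_false h2
    rw [h1, h3]
    exact ⟨rfl, h4⟩
  · exact relax1B_false h

-- ---------- B side: the inner fold over one adjacency list ----------

lemma innerB_mono (cd : Int × Int) (c : Int) :
    ∀ (l : List (Int × Int)) (acc : PySem.Dict (Int × Int) Int × Bool),
      DMono acc.1 (l.foldl (fun acc2 p => relaxStepB acc2 cd c p) acc).1 := by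
  intro l
  induction l with
  | nil => intro acc; exact dmono_refl _
  | cons p ps ih =>
    intro acc
    exact dmono_trans (relaxStepB_mono acc cd c p) (ih _)

lemma innerB_items (cd : Int × Int) (c : Int) :
    ∀ (l : List (Int × Int)) (acc : PySem.Dict (Int × Int) Int × Bool)
      (q : (Int × Int) × Int), q ∈ (l.foldl (fun acc2 p => relaxStepB acc2 cd c p) acc).1.items →
      q ∈ acc.1.items ∨ ∃ p ∈ l, q = ((p.1, cd.2), c + p.2) ∨
        (0 < cd.2 ∧ q = ((p.1, cd.2 - 1), c + PySem.Int.floordiv p.2 2)) := by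
  intro l
  induction l with
  | nil => intro acc q h; exact Or.inl h
  | cons p ps ih =>
    intro acc q h
    rcases ih _ q h with h1 | ⟨p', hp', h2⟩
    · rcases relaxStepB_items h1 with h2 | h2 | h2
      · exact Or.inl h2
      · exact Or.inr ⟨p, by simp, Or.inl h2⟩
      · exact Or.inr ⟨p, by simp, Or.inr h2⟩
    · exact Or.inr ⟨p', by simp [hp'], h2⟩

lemma innerB_cover (cd : Int × Int) (c : Int) :
    ∀ (l : List (Int × Int)) (acc : PySem.Dict (Int × Int) Int × Bool)
      (p : Int × Int), p ∈ l →
      (∃ c' ≤ c + p.2,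
        (l.foldl (fun acc2 p => relaxStepB acc2 cd c p) acc).1.get? (p.1, cd.2) = some c') ∧
      (0 < cd.2 → ∃ c' ≤ c + PySem.Int.floordiv p.2 2,
        (l.foldl (fun acc2 p => relaxStepB acc2 cd c p) acc).1.get? (p.1, cd.2 - 1) = some c') := by
  intro l
  induction l with
  | nil => intro acc p h; simp at h
  | cons x xs ih =>
    intro acc p h
    rcases List.mem_cons.mp h with rfl | h
    · constructor
      · obtain ⟨c', hle, hg⟩ := relaxStepB_cover1 acc cd c p
        obtain ⟨c'', hle', hg'⟩ := innerB_mono cd c xs (relaxStepB acc cd c p) _ _ hg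
        exact ⟨c'', by omega, hg'⟩
      · intro hd
        obtain ⟨c', hle, hg⟩ := relaxStepB_cover2 acc cd c p hd
        obtain ⟨c'', hle', hg'⟩ := innerB_mono cd c xs (relaxStepB acc cd c p) _ _ hg
        exact ⟨c'', by omega, hg'⟩
    · exact ih _ p h

lemma innerB_false (cd : Int × Int) (c : Int) :
    ∀ (l : List (Int × Int)) (acc : PySem.Dict (Int × Int) Int × Bool),
      (l.foldl (fun acc2 p => relaxStepB acc2 cd c p) acc).2 = false →
      (l.foldl (fun acc2 p => relaxStepB acc2 cd c p) acc).1 = acc.1 ∧ acc.2 = false := by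
  intro l
  induction l with
  | nil => intro acc h; exact ⟨rfl, h⟩
  | cons p ps ih =>
    intro acc h
    rw [List.foldl_cons] at h ⊢
    obtain ⟨h1, h2⟩ := ih _ h
    obtain ⟨h3, h4⟩ := relaxStepB_false h2
    rw [h1, h3]
    exact ⟨rfl, h4⟩

-- ---------- B side: one relaxation round ----------

lemma outerB_mono (adj : PySem.Dict Int (List (Int × Int))) :
    ∀ (l : List ((Int × Int) × Int)) (acc : PySem.Dict (Int × Int) Int × Bool),
      DMono acc.1 (l.foldl
        (fun acc it => (adj.getD it.1.1 []).foldl (fun acc2 p => relaxStepB acc2 it.1 it.2 p) acc)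
        acc).1 := by
  intro l
  induction l with
  | nil => intro acc; exact dmono_refl _
  | cons it l ih =>
    intro acc
    exact dmono_trans (innerB_mono it.1 it.2 _ acc) (ih _)

lemma roundB_mono (adj : PySem.Dict Int (List (Int × Int)))
    (dist : PySem.Dict (Int × Int) Int) : DMono dist (relaxRoundB adj dist).1 :=
  outerB_mono adj dist.items (dist, false)

lemma outerB_sound {disc : Int} {g : PySem.Dict Int (List (Int × Int))} :
    ∀ (l : List ((Int × Int) × Int)) (acc : PySem.Dict (Int × Int) Int × Bool),
      (∀ it ∈ l, ReachP g disc it.1 it.2) →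
      (∀ q ∈ acc.1.items, ReachP g disc q.1 q.2) →
      ∀ q ∈ (l.foldl
        (fun acc it => (g.getD it.1.1 []).foldl (fun acc2 p => relaxStepB acc2 it.1 it.2 p) acc)
        acc).1.items, ReachP g disc q.1 q.2 := by
  intro l
  induction l with
  | nil => intro acc _ hacc q hq; exact hacc q hq
  | cons it l ih =>
    intro acc hl hacc q hq
    refine ih _ (fun x hx => hl x (by simp [hx])) ?_ q hq
    intro q' hq'
    rcases innerB_items it.1 it.2 _ acc q' hq' with h | ⟨p, hp, h | ⟨hd, h⟩⟩
    · exact hacc q' h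
    · have hreach : ReachP g disc it.1 it.2 := hl it (by simp)
      have hedge : EdgeP g (it.1.1, it.1.2) (p.1, it.1.2) p.2 := EdgeP.full hp
      subst h
      exact reach_step hreach hedge
    · have hreach : ReachP g disc it.1 it.2 := hl it (by simp)
      have hedge : EdgeP g (it.1.1, it.1.2) (p.1, it.1.2 - 1) (PySem.Int.floordiv p.2 2) :=
        EdgeP.half hp hd
      subst h
      exact reach_step hreach hedge

lemma roundB_sound {disc : Int} {g : PySem.Dict Int (List (Int × Int))}
    {dist : PySem.Dict (Int × Int) Int}
    (hsound : ∀ q ∈ dist.items, ReachP g disc q.1 q.2) :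
    ∀ q ∈ (relaxRoundB g dist).1.items, ReachP g disc q.1 q.2 :=
  outerB_sound dist.items (dist, false) (fun it hit => hsound it hit) hsound

lemma edgeP_elim {g : PySem.Dict Int (List (Int × Int))} {s t : Int × Int} {w : Int}
    (he : EdgeP g s t w) :
    (∃ toll, (t.1, toll) ∈ adjOf g s.1 ∧ w = toll ∧ t.2 = s.2) ∨
    (∃ toll, (t.1, toll) ∈ adjOf g s.1 ∧ 0 < s.2 ∧ w = PySem.Int.floordiv toll 2 ∧
      t.2 = s.2 - 1) := by
  cases he with
  | full hm => exact Or.inl ⟨_, hm, rfl, rfl⟩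
  | half hm hd => exact Or.inr ⟨_, hm, hd, rfl, rfl⟩

lemma outerB_cover {g : PySem.Dict Int (List (Int × Int))} {s : Int × Int} {c : Int} :
    ∀ (l : List ((Int × Int) × Int)) (acc : PySem.Dict (Int × Int) Int × Bool),
      (s, c) ∈ l →
      ∀ t w, EdgeP g s t w →
      ∃ c' ≤ c + w, (l.foldl
        (fun acc it => (g.getD it.1.1 []).foldl (fun acc2 p => relaxStepB acc2 it.1 it.2 p) acc)
        acc).1.get? t = some c' := by
  intro l
  induction l with
  | nil => intro acc h; simp at h
  | cons it l ih =>
    intro acc hmem t w he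
    rcases List.mem_cons.mp hmem with heq | hmem'
    · -- this entry is processed now; then monotonicity
      have hit : it = (s, c) := heq.symm
      subst hit
      have hcov : ∃ c' ≤ c + w,
          ((g.getD s.1 []).foldl (fun acc2 p => relaxStepB acc2 (s, c).1 (s, c).2 p) acc).1.get? t
            = some c' := by
        rcases edgeP_elim he with ⟨toll, hadj, hw, ht2⟩ | ⟨toll, hadj, hd, hw, ht2⟩
        · obtain ⟨hc1, _⟩ := innerB_cover s c (g.getD s.1 []) acc (t.1, toll) hadj
          rw [hw, show t = (t.1, s.2) from by rw [← ht2]]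
          exact hc1
        · obtain ⟨_, hc2⟩ := innerB_cover s c (g.getD s.1 []) acc (t.1, toll) hadj
          rw [hw, show t = (t.1, s.2 - 1) from by rw [← ht2]]
          exact hc2 hd
      obtain ⟨c', hle, hg'⟩ := hcov
      obtain ⟨c'', hle', hg''⟩ := outerB_mono g l _ _ _ hg'
      exact ⟨c'', by omega, hg''⟩
    · exact ih _ hmem' t w he

lemma roundB_cover {g : PySem.Dict Int (List (Int × Int))}
    {dist : PySem.Dict (Int × Int) Int} {s : Int × Int} {c : Int}
    (h : dist.get? s = some c) {t : Int × Int} {w : Int} (he : EdgeP g s t w) :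
    ∃ c' ≤ c + w, (relaxRoundB g dist).1.get? t = some c' :=
  outerB_cover dist.items (dist, false) (dget_mem h) t w he

lemma outerB_false (adj : PySem.Dict Int (List (Int × Int))) :
    ∀ (l : List ((Int × Int) × Int)) (acc : PySem.Dict (Int × Int) Int × Bool),
      (l.foldl
        (fun acc it => (adj.getD it.1.1 []).foldl (fun acc2 p => relaxStepB acc2 it.1 it.2 p) acc)
        acc).2 = false →
      (l.foldl
        (fun acc it => (adj.getD it.1.1 []).foldl (fun acc2 p => relaxStepB acc2 it.1 it.2 p) acc)
        acc).1 = acc.1 ∧ acc.2 = false := by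
  intro l
  induction l with
  | nil => intro acc h; exact ⟨rfl, h⟩
  | cons it l ih =>
    intro acc h
    rw [List.foldl_cons] at h ⊢
    obtain ⟨h1, h2⟩ := ih _ h
    obtain ⟨h3, h4⟩ := innerB_false it.1 it.2 _ acc h2
    rw [h1, h3]
    exact ⟨rfl, h4⟩

lemma roundB_false {g : PySem.Dict Int (List (Int × Int))}
    {dist : PySem.Dict (Int × Int) Int} (h : (relaxRoundB g dist).2 = false) :
    (relaxRoundB g dist).1 = dist :=
  (outerB_false g dist.items (dist, false) h).1

-- ---------- B side: the main loop ----------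

/-- every walk of ≤ m steps is covered by an entry of no larger cost. -/
def CoverUpTo (g : PySem.Dict Int (List (Int × Int))) (disc : Int)
    (dd : PySem.Dict (Int × Int) Int) (m : Nat) : Prop :=
  ∀ t c (l : List (Int × Int)), WFrom g (0, disc) t c l → l.length ≤ m →
    ∃ c' ≤ c, dd.get? t = some c'

def ClosedD (g : PySem.Dict Int (List (Int × Int))) (dd : PySem.Dict (Int × Int) Int) : Prop :=
  ∀ s c, dd.get? s = some c → ∀ t w, EdgeP g s t w → ∃ c' ≤ c + w, dd.get? t = some c'

lemma closed_cover {g : PySem.Dict Int (List (Int × Int))} {disc : Int}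
    {dd : PySem.Dict (Int × Int) Int} (hcl : ClosedD g dd)
    (hs0 : ∃ c0 ≤ 0, dd.get? (0, disc) = some c0) :
    ∀ (l : List (Int × Int)) t c, WFrom g (0, disc) t c l → ∃ c' ≤ c, dd.get? t = some c' := by
  intro l
  induction l using List.reverseRecOn with
  | nil =>
    intro t c hw
    obtain ⟨rfl, rfl⟩ := wfrom_nil hw
    exact hs0
  | append_singleton l v ih =>
    intro t c hw
    obtain ⟨rfl, c1, w, m, hw', he, rfl⟩ := wfrom_snoc hw
    obtain ⟨c1', hle, hg⟩ := ih m c1 hw'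
    obtain ⟨c', hle', hg'⟩ := hcl m c1' hg _ w he
    exact ⟨c', by omega, hg'⟩

lemma cover_succ {g : PySem.Dict Int (List (Int × Int))} {disc : Int}
    {dist : PySem.Dict (Int × Int) Int} {m : Nat} (hc : CoverUpTo g disc dist m) :
    CoverUpTo g disc (relaxRoundB g dist).1 (m + 1) := by
  intro t c l hw hl
  cases hl2 : l.reverse with
  | nil =>
    have : l = [] := by simpa using congrArg List.reverse hl2
    subst this
    obtain ⟨rfl, rfl⟩ := wfrom_nil hw
    obtain ⟨c', hle, hg⟩ := hc _ 0 [] (WFrom.refl _) (by simp)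
    obtain ⟨c'', hle', hg'⟩ := roundB_mono g dist _ _ hg
    exact ⟨c'', by omega, hg'⟩
  | cons v rl =>
    have hl3 : l = rl.reverse ++ [v] := by
      have := congrArg List.reverse hl2
      simpa using this
    subst hl3
    obtain ⟨rfl, c1, w, mm, hw', he, rfl⟩ := wfrom_snoc hw
    have hlen : rl.reverse.length ≤ m := by
      simp only [List.length_append, List.length_reverse, List.length_singleton] at hl
      simp
      omega
    obtain ⟨c1', hle, hg⟩ := hc mm c1 _ hw' hlen
    obtain ⟨c', hle', hg'⟩ := roundB_cover hg he
    exact ⟨c', by omega, hg'⟩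

lemma bfLoopB_good {disc : Int} {g : PySem.Dict Int (List (Int × Int))} :
    ∀ (k : Nat) (dist : PySem.Dict (Int × Int) Int) (m : Nat),
      (∀ q ∈ dist.items, ReachP g disc q.1 q.2) →
      CoverUpTo g disc dist m →
      (∀ q ∈ (bfLoopB g k dist).items, ReachP g disc q.1 q.2) ∧
      (CoverUpTo g disc (bfLoopB g k dist) (m + k) ∨
        ∀ l t c, WFrom g (0, disc) t c l → ∃ c' ≤ c, (bfLoopB g k dist).get? t = some c') := by
  intro k
  induction k with
  | zero =>
    intro dist m hsound hcover
    exact ⟨hsound, Or.inl (by simpa using hcover)⟩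
  | succ k ih =>
    intro dist m hsound hcover
    simp only [bfLoopB]
    by_cases hch : (relaxRoundB g dist).2
    · rw [if_pos hch]
      obtain ⟨hS, hC⟩ := ih (relaxRoundB g dist).1 (m + 1) (roundB_sound hsound)
        (cover_succ hcover)
      refine ⟨hS, ?_⟩
      rcases hC with hC | hC
      · exact Or.inl (by
          have : m + 1 + k = m + (k + 1) := by omega
          rwa [this] at hC)
      · exact Or.inr hC
    · rw [if_neg hch]
      have heq := roundB_false (g := g) (dist := dist) (by simpa using hch)
      rw [heq]
      refine ⟨hsound, Or.inr ?_⟩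
      have hclosed : ClosedD g dist := by
        intro s c hgets t w he
        have := roundB_cover hgets he
        rwa [heq] at this
      have hs0 : ∃ c0 ≤ 0, dist.get? (0, disc) = some c0 :=
        hcover _ 0 [] (WFrom.refl _) (by simp)
      exact closed_cover hclosed hs0

-- ---------- B side: the final scan ----------

lemma bestScanB_none {dist : PySem.Dict (Int × Int) Int} {n d : Int} (b0 : Option Int)
    (h : dist.get? (n - 1, d) = none) : bestScanB dist n b0 d = b0 := by
  unfold bestScanB; rw [h]

lemma bestScanB_some_none {dist : PySem.Dict (Int × Int) Int} {n d c : Int}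
    (h : dist.get? (n - 1, d) = some c) : bestScanB dist n none d = some c := by
  unfold bestScanB; rw [h]

lemma bestScanB_some_some {dist : PySem.Dict (Int × Int) Int} {n d c b : Int}
    (h : dist.get? (n - 1, d) = some c) :
    bestScanB dist n (some b) d = if c < b then some c else some b := by
  unfold bestScanB; rw [h]

lemma scanB_spec (dist : PySem.Dict (Int × Int) Int) (n : Int) :
    ∀ (ds : List Int) (b0 : Option Int),
      ((ds.foldl (bestScanB dist n) b0 = none →
          b0 = none ∧ ∀ d ∈ ds, dist.get? (n - 1, d) = none) ∧
        (∀ b, ds.foldl (bestScanB dist n) b0 = some b →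
          (b0 = some b ∨ ∃ d ∈ ds, dist.get? (n - 1, d) = some b) ∧
          (∀ d ∈ ds, ∀ c, dist.get? (n - 1, d) = some c → b ≤ c) ∧
          (∀ b', b0 = some b' → b ≤ b'))) := by
  intro ds
  induction ds with
  | nil => intro b0; exact ⟨fun h => ⟨h, by simp⟩, fun b h => ⟨Or.inl h, by simp, fun b' h' => by
      rw [h'] at h; injection h with h; omega⟩⟩
  | cons d ds ih =>
    intro b0
    constructor
    · intro h
      simp only [List.foldl_cons] at h
      obtain ⟨h1, h2⟩ := (ih (bestScanB dist n b0 d)).1 h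
      cases hg : dist.get? (n - 1, d) with
      | none =>
        rw [bestScanB_none b0 hg] at h1
        refine ⟨h1, ?_⟩
        intro d' hd'
        rcases List.mem_cons.mp hd' with rfl | hd'
        · exact hg
        · exact h2 d' hd'
      | some cv =>
        exfalso
        cases hb0 : b0 with
        | none => rw [hb0, bestScanB_some_none hg] at h1; cases h1
        | some bv =>
          rw [hb0, bestScanB_some_some hg] at h1
          split_ifs at h1 <;> cases h1
    · intro b h
      simp only [List.foldl_cons] at h
      obtain ⟨h1, h2, h3⟩ := (ih (bestScanB dist n b0 d)).2 b h
      cases hg : dist.get? (n - 1, d) with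
      | none =>
        rw [bestScanB_none b0 hg] at h1 h3
        refine ⟨?_, ?_, h3⟩
        · rcases h1 with h1 | ⟨d', hd', h1⟩
          · exact Or.inl h1
          · exact Or.inr ⟨d', by simp [hd'], h1⟩
        · intro d' hd' c hc
          rcases List.mem_cons.mp hd' with rfl | hd'
          · rw [hg] at hc; exact absurd hc (by simp)
          · exact h2 d' hd' c hc
      | some cv =>
        cases hb0 : b0 with
        | none =>
          rw [hb0, bestScanB_some_none hg] at h1 h3
          have hble : b ≤ cv := by
            rcases h1 with h1 | _
            · injection h1 with h1; omega
            · exact h3 cv rfl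
          refine ⟨?_, ?_, by intro b' hb'; cases hb'⟩
          · rcases h1 with h1 | ⟨d', hd', h1⟩
            · exact Or.inr ⟨d, by simp, hg.trans h1⟩
            · exact Or.inr ⟨d', by simp [hd'], h1⟩
          · intro d' hd' c hc
            rcases List.mem_cons.mp hd' with rfl | hd'
            · rw [hg] at hc; injection hc with hc; omega
            · exact h2 d' hd' c hc
        | some bv =>
          rw [hb0, bestScanB_some_some hg] at h1 h3
          by_cases hlt : cv < bv
          · rw [if_pos hlt] at h1 h3
            have hble : b ≤ cv := by
              rcases h1 with h1 | _
              · injection h1 with h1; omega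
              · exact h3 cv rfl
            refine ⟨?_, ?_, ?_⟩
            · rcases h1 with h1 | ⟨d', hd', h1⟩
              · exact Or.inr ⟨d, by simp, hg.trans h1⟩
              · exact Or.inr ⟨d', by simp [hd'], h1⟩
            · intro d' hd' c hc
              rcases List.mem_cons.mp hd' with rfl | hd'
              · rw [hg] at hc; injection hc with hc; omega
              · exact h2 d' hd' c hc
            · intro b' hb'
              injection hb' with hb'
              omega
          · rw [if_neg hlt] at h1 h3
            have hble : b ≤ bv := h3 bv rfl
            refine ⟨?_, ?_, ?_⟩
            · rcases h1 with h1 | ⟨d', hd', h1⟩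
              · exact Or.inl h1
              · exact Or.inr ⟨d', by simp [hd'], h1⟩
            · intro d' hd' c hc
              rcases List.mem_cons.mp hd' with rfl | hd'
              · rw [hg] at hc; injection hc with hc; omega
              · exact h2 d' hd' c hc
            · intro b' hb'
              injection hb' with hb'
              omega

-- ---------- B side: top-level ----------

lemma minimumCost_alt_good {n : Int} {highways : List (List Int)} {disc : Int}
    {g : PySem.Dict Int (List (Int × Int))}
    (hbuild : buildGraphA highways = some g)
    (hg : GWf n g) (hn : 0 < n) (hdisc : 0 ≤ disc) :
    GoodR n g disc (minimumCost_alt n highways disc) := by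
  rw [minimumCost_alt, build_eq, hbuild]
  simp only []
  set dist0 := (PySem.Dict.empty : PySem.Dict (Int × Int) Int).insert (0, disc) 0 with hd0
  have hsound0 : ∀ q ∈ dist0.items, ReachP g disc q.1 q.2 := by
    intro q hq
    rcases mem_items_insert hq with rfl | h
    · exact ⟨[], WFrom.refl _⟩
    · simp [PySem.Dict.empty] at h
  have hcover0 : CoverUpTo g disc dist0 0 := by
    intro t c l hw hl
    have : l = [] := by simpa using hl
    subst this
    obtain ⟨rfl, rfl⟩ := wfrom_nil hw
    exact ⟨0, le_refl 0, PySem.Dict.get?_insert_self _ _ _⟩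
  obtain ⟨hRS, hRC⟩ := bfLoopB_good (n * (disc + 1)).toNat dist0 0 hsound0 hcover0
  set R := bfLoopB g (n * (disc + 1)).toNat dist0 with hR
  -- every reachable state is covered
  have hfull : ∀ t c, ReachP g disc t c → ∃ c' ≤ c, R.get? t = some c' := by
    intro t c hr
    obtain ⟨l, hw⟩ := hr
    rcases hRC with hC | hC
    · obtain ⟨l', c', hle, hlen, hw'⟩ := wfrom_shorten hg hn hdisc hw
      obtain ⟨c'', hle', hget⟩ := hC t c' l' hw' (by omega)
      exact ⟨c'', by omega, hget⟩
    · exact hC l t c hw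
  have hscan := scanB_spec R n (PySem.List.pyRange 0 (disc + 1) 1) none
  cases hres : (PySem.List.pyRange 0 (disc + 1) 1).foldl (bestScanB R n) none with
  | none =>
    obtain ⟨_, hnone⟩ := hscan.1 hres
    refine Or.inr ⟨rfl, ?_⟩
    intro x d hr
    obtain ⟨l, hw⟩ := hr
    have hbox := (wfrom_box hg hw ⟨le_refl 0, hn, hdisc, le_refl disc⟩).1
    have hd : d ∈ PySem.List.pyRange 0 (disc + 1) 1 :=
      PySem.List.mem_pyRange_one.mpr ⟨hbox.2.2.1, by have := hbox.2.2.2; omega⟩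
    obtain ⟨c', hle, hget⟩ := hfull (n - 1, d) x ⟨l, hw⟩
    rw [hnone d hd] at hget
    cases hget
  | some b =>
    show GoodR n g disc b
    obtain ⟨hwit, hmin, _⟩ := hscan.2 b hres
    rcases hwit with hwit | ⟨d, hd, hwit⟩
    · cases hwit
    · refine Or.inl ⟨⟨d, ?_⟩, ?_⟩
      · have := hRS _ (dget_mem hwit)
        exact this
      · intro x d' hr
        obtain ⟨l, hw⟩ := hr
        have hbox := (wfrom_box hg hw ⟨le_refl 0, hn, hdisc, le_refl disc⟩).1
        have hd' : d' ∈ PySem.List.pyRange 0 (disc + 1) 1 :=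
          PySem.List.mem_pyRange_one.mpr ⟨hbox.2.2.1, by have := hbox.2.2.2; omega⟩
        obtain ⟨c', hle, hget⟩ := hfull (n - 1, d') x ⟨l, hw⟩
        have := hmin d' hd' c' hget
        omega


-- ---------- the single-city case (city labels unconstrained) ----------

lemma loopA_one (g : PySem.Dict Int (List (Int × Int))) (disc : Int) :
    ∀ (fuel : Nat) (vis : List (List Bool)), loopA 1 g (fuel + 1) [(0, 0, disc)] vis = 0 := by
  intro fuel vis
  rw [loopA]
  simp [popMinA]

lemma minimumCost_one {highways : List (List Int)} {disc : Int}
    {g : PySem.Dict Int (List (Int × Int))} (hbuild : buildGraphA highways = some g) :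
    minimumCost 1 highways disc = 0 := by
  rw [minimumCost, hbuild]
  show loopA 1 g (((1 : Int).toNat * (disc + 1).toNat + 1) * (4 * highways.length + 2) + 2)
      [(0, 0, disc)] (List.replicate (1 : Int).toNat (List.replicate (disc + 1).toNat false)) = 0
  have hfe : ((1 : Int).toNat * (disc + 1).toNat + 1) * (4 * highways.length + 2) + 2
      = (((1 : Int).toNat * (disc + 1).toNat + 1) * (4 * highways.length + 2) + 1) + 1 := by
    omega
  rw [hfe, loopA_one]

lemma minimumCost_alt_one {highways : List (List Int)} {disc : Int}
    {g : PySem.Dict Int (List (Int × Int))}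
    (hbuild : buildGraphA highways = some g) (hg : GWt g) (hdisc : 0 ≤ disc) :
    minimumCost_alt 1 highways disc = 0 := by
  rw [minimumCost_alt, build_eq, hbuild]
  simp only []
  set dist0 := (PySem.Dict.empty : PySem.Dict (Int × Int) Int).insert (0, disc) 0 with hd0
  have hsound0 : ∀ q ∈ dist0.items, ReachP g disc q.1 q.2 := by
    intro q hq
    rcases mem_items_insert hq with rfl | h
    · exact ⟨[], WFrom.refl _⟩
    · simp [PySem.Dict.empty] at h
  have hcover0 : CoverUpTo g disc dist0 0 := by
    intro t c l hw hl
    have : l = [] := by simpa using hl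
    subst this
    obtain ⟨rfl, rfl⟩ := wfrom_nil hw
    exact ⟨0, le_refl 0, PySem.Dict.get?_insert_self _ _ _⟩
  obtain ⟨hRS, hRC⟩ := bfLoopB_good ((1 : Int) * (disc + 1)).toNat dist0 0 hsound0 hcover0
  set R := bfLoopB g ((1 : Int) * (disc + 1)).toNat dist0 with hR
  have hs0R : R.get? (0, disc) = some 0 := by
    have hcov : ∃ c0 ≤ 0, R.get? (0, disc) = some c0 := by
      rcases hRC with hC | hC
      · exact hC _ 0 [] (WFrom.refl _) (by simp)
      · exact hC [] _ 0 (WFrom.refl _)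
    obtain ⟨c0, hle, hget⟩ := hcov
    have := wfrom_nonneg hg (hRS _ (dget_mem hget)).choose_spec
    have hc0 : c0 = 0 := by omega
    rw [hc0] at hget
    exact hget
  have h10 : (1 : Int) - 1 = 0 := by norm_num
  have hdm : disc ∈ PySem.List.pyRange 0 (disc + 1) 1 :=
    PySem.List.mem_pyRange_one.mpr ⟨hdisc, by omega⟩
  have hscan := scanB_spec R 1 (PySem.List.pyRange 0 (disc + 1) 1) none
  cases hres : (PySem.List.pyRange 0 (disc + 1) 1).foldl (bestScanB R 1) none with
  | none =>
    exfalso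
    obtain ⟨_, hnone⟩ := hscan.1 hres
    have := hnone disc hdm
    rw [h10, hs0R] at this
    cases this
  | some b =>
    show b = 0
    obtain ⟨hwit, hmin, _⟩ := hscan.2 b hres
    have hble : b ≤ 0 := by
      have := hmin disc hdm 0 (by rw [h10]; exact hs0R)
      omega
    rcases hwit with hwit | ⟨d, hd, hwit⟩
    · cases hwit
    · have hreach : ReachP g disc ((1 : Int) - 1, d) b := hRS _ (dget_mem hwit)
      obtain ⟨l, hw⟩ := hreach
      have := wfrom_nonneg hg hw
      omega


-- ---------- the isolated-start case (no row mentions city 0) ----------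

lemma build_isolated {highways : List (List Int)}
    (hlen3 : ∀ h ∈ highways, h.length = 3)
    (hz : ∀ h ∈ highways, h.getD 0 0 ≠ 0 ∧ h.getD 1 0 ≠ 0) :
    ∃ g, buildGraphA highways = some g ∧ adjOf g 0 = [] := by
  obtain ⟨g, hfold, hP, _⟩ := build_aux (P := fun u _ _ => u ≠ 0) highways PySem.Dict.empty
    (fun h hh => ⟨hlen3 h hh, (hz h hh).1, (hz h hh).2⟩)
    (by
      intro u v toll hm
      simp [adjOf, PySem.Dict.getD, PySem.Dict.get?, PySem.Dict.empty] at hm)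
  refine ⟨g, hfold, List.eq_nil_iff_forall_not_mem.mpr ?_⟩
  intro p hp
  exact hP 0 p.1 p.2 (by simpa using hp) rfl

lemma minimumCost_isolated {n : Int} {highways : List (List Int)} {disc : Int}
    {g : PySem.Dict Int (List (Int × Int))} (hbuild : buildGraphA highways = some g)
    (hn2 : 1 < n) (hdisc : 0 ≤ disc) (hadj : adjOf g 0 = []) :
    minimumCost n highways disc = -1 := by
  rw [minimumCost, hbuild]
  set vis0 := List.replicate n.toNat (List.replicate (disc + 1).toNat false) with hv0
  show loopA n g ((n.toNat * (disc + 1).toNat + 1) * (4 * highways.length + 2) + 2)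
      [(0, 0, disc)] vis0 = -1
  have hs : ShapeV n disc vis0 := ⟨by simp [hv0], by
    intro row hr
    rw [hv0] at hr
    simp at hr
    simp [hr.2]⟩
  have hbox : InBox n disc ((0 : Int), disc) := ⟨le_refl 0, by omega, hdisc, le_refl disc⟩
  have hfe : (n.toNat * (disc + 1).toNat + 1) * (4 * highways.length + 2) + 2
      = ((n.toNat * (disc + 1).toNat + 1) * (4 * highways.length + 2) + 1) + 1 := by omega
  rw [hfe, loopA]
  simp only [popMinA]
  rw [if_neg (show ¬ ((0 : Int) = n - 1) from by omega)]
  obtain ⟨hi, hj, hget⟩ := vgetA_box hs hbox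
  rw [hget]
  have hcell : (vis0[((0 : Int), disc).1.toNat]'(by omega))[((0 : Int), disc).2.toNat]'(by omega)
      = false := by
    simp [hv0]
  rw [hcell, vsetA_box hs hbox]
  have hpush : pushesA g 0 0 disc = [] := by
    rw [pushesA]
    show (adjOf g 0).flatMap _ = []
    rw [hadj]
    rfl
  rw [hpush]
  rfl

lemma dist0_items (disc : Int) :
    ((PySem.Dict.empty : PySem.Dict (Int × Int) Int).insert (0, disc) 0).items
      = [((0, disc), 0)] := rfl

lemma minimumCost_alt_isolated {n : Int} {highways : List (List Int)} {disc : Int}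
    {g : PySem.Dict Int (List (Int × Int))} (hbuild : buildGraphA highways = some g)
    (hn : 1 ≤ n) (hdisc : 0 ≤ disc) (hadj : adjOf g 0 = []) :
    minimumCost_alt n highways disc = if n = 1 then 0 else -1 := by
  rw [minimumCost_alt, build_eq, hbuild]
  simp only []
  set dist0 := (PySem.Dict.empty : PySem.Dict (Int × Int) Int).insert (0, disc) 0 with hd0
  have hround : relaxRoundB g dist0 = (dist0, false) := by
    rw [relaxRoundB, dist0_items]
    simp only [List.foldl_cons, List.foldl_nil]
    show List.foldl (fun acc2 p => relaxStepB acc2 ((0 : Int), disc) 0 p) (dist0, false)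
        (g.getD 0 []) = (dist0, false)
    rw [show g.getD (0 : Int) [] = [] from hadj]
    rfl
  have hbf : bfLoopB g (n * (disc + 1)).toNat dist0 = dist0 := by
    cases hk : (n * (disc + 1)).toNat with
    | zero => rfl
    | succ k => simp [bfLoopB, hround]
  rw [hbf]
  have hdm : disc ∈ PySem.List.pyRange 0 (disc + 1) 1 :=
    PySem.List.mem_pyRange_one.mpr ⟨hdisc, by omega⟩
  have hscan := scanB_spec dist0 n (PySem.List.pyRange 0 (disc + 1) 1) none
  by_cases h1 : n = 1
  · subst h1
    rw [if_pos rfl]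
    have hs0 : dist0.get? ((1 : Int) - 1, disc) = some 0 := by
      rw [show ((1 : Int) - 1, disc) = ((0 : Int), disc) from by norm_num]
      exact PySem.Dict.get?_insert_self _ _ _
    cases hres : (PySem.List.pyRange 0 (disc + 1) 1).foldl (bestScanB dist0 1) none with
    | none =>
      exfalso
      obtain ⟨_, hnone⟩ := hscan.1 hres
      rw [hnone disc hdm] at hs0
      cases hs0
    | some b =>
      show b = 0
      obtain ⟨hwit, hmin, _⟩ := hscan.2 b hres
      rcases hwit with hwit | ⟨d, hd, hwit⟩
      · cases hwit
      · have := dget_mem hwit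
        rw [dist0_items] at this
        simp at this
        omega
  · rw [if_neg h1]
    have hnone : ∀ d ∈ PySem.List.pyRange 0 (disc + 1) 1, dist0.get? (n - 1, d) = none := by
      intro d _
      rw [hd0, PySem.Dict.get?_insert_of_ne, PySem.Dict.get?_empty]
      intro he
      have := congrArg Prod.fst he
      simp at this
      omega
    have hres : (PySem.List.pyRange 0 (disc + 1) 1).foldl (bestScanB dist0 n) none = none := by
      have : ∀ (ds : List Int), (∀ d ∈ ds, dist0.get? (n - 1, d) = none) →
          ds.foldl (bestScanB dist0 n) none = none := by
        intro ds
        induction ds with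
        | nil => intro _; rfl
        | cons d ds ih =>
          intro h
          rw [List.foldl_cons, bestScanB_none none (h d (by simp))]
          exact ih fun d' hd' => h d' (by simp [hd'])
      exact this _ hnone
    rw [hres]

-- ===== VERDICT (by name: the statement is the Claim_ definition above) =====
theorem minimumCost_spec : Claim_equal_minimumCost := by
  intro n highways discounts hdom hpre
  obtain ⟨hn, hdisc, hlen3, hrows | hzero⟩ := hpre
  · obtain ⟨g, hbuild, hgwt, hgwf, hlen⟩ := build_props hlen3 hrows
    show minimumCost n highways discounts = minimumCost_alt n highways discounts
    by_cases h2 : 1 < n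
    · have hA := minimumCost_good hbuild (hgwf h2) hlen (by omega) hdisc
      have hB := minimumCost_alt_good hbuild (hgwf h2) (by omega) hdisc
      exact goodR_unique hA hB
    · have h1 : n = 1 := by omega
      subst h1
      rw [minimumCost_one hbuild, minimumCost_alt_one hbuild hgwt hdisc]
  · obtain ⟨g, hbuild, hadj⟩ := build_isolated hlen3 hzero
    show minimumCost n highways discounts = minimumCost_alt n highways discounts
    rw [minimumCost_alt_isolated hbuild hn hdisc hadj]
    by_cases h1 : n = 1
    · subst h1
      rw [if_pos rfl, minimumCost_one hbuild]
    · rw [if_neg h1, minimumCost_isolated hbuild (by omega) hdisc hadj]
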